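-- pv_equiv track=rewrite | github.com/k4west/Algorithm | 프로그래머스/unrated/250136. ［PCCP 기출문제］ 2번 ／ 석유 시추/［PCCP 기출문제］ 2번 ／ 석유 시추.py | solution
-- ===== SOURCE A (Python) =====
-- def solution(land):
--     d = ((1, 0), (0, 1), (-1, 0), (0, -1))
--     n, m = len(land), len(land[0])
--     oil = [0]*m
--
--     def find(i, j):
--         q, c = [(i, j)], 1
--         v = {j}
--         while q:
--             x, y = q.pop(0)
--             for dx, dy in d:
--                 nx, ny = x + dx, y + dy
--                 if 0 <= nx < n and 0 <= ny < m and land[nx][ny]: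
--                     land[nx][ny] = 0
--                     q.append((nx, ny))
--                     v.add(ny)
--                     c += 1
--         for i in v:
--             oil[i] += c
--
--     for i in range(n):
--         for j in range(m):
--             if land[i][j]:
--                 land[i][j] = 0
--                 find(i, j)
--
--     return max(oil)
-- ===== SOURCE B (Python) =====
-- def solution(land):
--     # Connected-component labeling by iterative min-label propagation (no BFS/DFS,
--     # no queue/stack); works read-only on `land` (return-value equivalence: A
--     # zeroes `land` in place, B does not mutate it).
--     n, m = len(land), len(land[0])
--     lab = [[(i * m + j) if land[i][j] else -1 for j in range(m)] for i in range(n)]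
--     changed = True
--     while changed:
--         changed = False
--         for i in range(n):
--             for j in range(m):
--                 r = lab[i][j]
--                 if r != -1:
--                     for x, y in ((i - 1, j), (i + 1, j), (i, j - 1), (i, j + 1)):
--                         if 0 <= x < n and 0 <= y < m and lab[x][y] != -1 and lab[x][y] < r:
--                             r = lab[x][y]
--                     if r < lab[i][j]:
--                         lab[i][j] = r
--                         changed = True
--     col_labels = [set() for _ in range(m)]
--     sizes = []
--     for i in range(n):
--         for j in range(m):
--             r = lab[i][j]
--             if r != -1:
--                 col_labels[j].add(r)
--                 sizes.append(r)
--     best = 0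
--     for c in range(m):
--         total = sum(1 for r in sizes if r in col_labels[c])
--         best = max(best, total)
--     return best
-- ===== Notes on version B (the rewrite author's own statement) =====
-- stated objective: alternative
-- what changed: A flood-fills each component with a BFS queue mutating `land` in place and accumulates component sizes into a per-column oil array during the scan; B never traverses components at all: it labels every oil cell with its cell id and iteratively relaxes each label to the minimum of its oil neighbours until a fixpoint (connected-component labeling by min-label propagation), then counts, per column, the oil cells whose label occurs in that column and returns the maximum count. B does not mutate the caller's `land` (return-value equivalence).
import Mathlib
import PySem

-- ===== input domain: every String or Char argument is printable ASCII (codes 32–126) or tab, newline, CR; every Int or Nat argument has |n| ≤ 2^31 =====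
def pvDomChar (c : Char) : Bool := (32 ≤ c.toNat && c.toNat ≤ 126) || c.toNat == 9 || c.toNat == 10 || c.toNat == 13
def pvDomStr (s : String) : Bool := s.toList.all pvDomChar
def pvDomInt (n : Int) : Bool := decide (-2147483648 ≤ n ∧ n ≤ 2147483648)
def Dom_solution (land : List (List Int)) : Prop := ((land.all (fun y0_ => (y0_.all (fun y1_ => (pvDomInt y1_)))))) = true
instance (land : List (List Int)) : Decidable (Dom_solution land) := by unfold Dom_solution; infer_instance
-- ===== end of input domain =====

-- B replaces A's in-place BFS flood fill by connected-component labeling via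
-- iterative min-label propagation to a fixpoint, then counts per column the oil
-- cells whose label occurs in that column; equivalence is about the RETURN value
-- only (A zeroes `land` in place, B does not mutate it).

-- ===== PORT A =====
-- grid primitives (exact for the guarded accesses the Python makes: every
-- read/write below is guarded by 0 ≤ x < n, 0 ≤ y < m before it happens)
def pvGetC (g : List (List Int)) (x y : Int) : Int := (g.getD x.toNat []).getD y.toNat 0

def pvSetC (g : List (List Int)) (x y : Int) : List (List Int) :=
  g.modify x.toNat (fun row => row.set y.toNat 0)

abbrev pvOk (n m : Int) (g : List (List Int)) (p : Int × Int) : Prop :=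
  0 ≤ p.1 ∧ p.1 < n ∧ 0 ≤ p.2 ∧ p.2 < m ∧ pvGetC g p.1 p.2 ≠ 0

-- the body of A's neighbour test: zero the fresh cell, push it on the queue,
-- record its column, bump the counter
def pvStep (n m : Int) (st : List (List Int) × List (Int × Int) × List Int × Int)
    (p : Int × Int) : List (List Int) × List (Int × Int) × List Int × Int :=
  if pvOk n m st.1 p then
    (pvSetC st.1 p.1 p.2, st.2.1 ++ [p], PySem.Set.add st.2.2.1 p.2, st.2.2.2 + 1)
  else st

-- number of still-nonzero cells in the n×m window (termination measure only)
def pvOkCount (n m : Int) (g : List (List Int)) : Nat :=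
  (((Finset.range n.toNat) ×ˢ (Finset.range m.toNat)).filter
    (fun p => pvGetC g (p.1 : Int) (p.2 : Int) ≠ 0)).card

lemma pvGetC_bounds {g : List (List Int)} {x y : Int} (h : pvGetC g x y ≠ 0) :
    x.toNat < g.length ∧ y.toNat < (g.getD x.toNat []).length := by
  unfold pvGetC at h
  constructor
  · by_contra hx
    rw [List.getD_eq_default _ _ (Nat.le_of_not_lt hx)] at h
    simp at h
  · by_contra hy
    rw [List.getD_eq_default _ _ (Nat.le_of_not_lt hy)] at h
    exact h rfl

lemma pvGetC_pvSetC_self {g : List (List Int)} {x y : Int} (h : pvGetC g x y ≠ 0) :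
    pvGetC (pvSetC g x y) x y = 0 := by
  obtain ⟨hx, hy⟩ := pvGetC_bounds h
  unfold pvGetC pvSetC
  rw [List.getD_eq_getElem?_getD (l := g.modify _ _), List.getElem?_modify,
    List.getElem?_eq_getElem hx]
  have hrow : g[x.toNat] = g.getD x.toNat [] := (List.getD_eq_getElem g [] hx).symm
  simp only [Option.map_eq_map, Option.map_some, Option.getD_some, if_true, hrow]
  rw [List.getD_eq_getElem?_getD, List.getElem?_set]
  have hy' : y.toNat < (g[x.toNat]?.getD []).length := by
    rw [List.getElem?_eq_getElem hx]; simpa [hrow] using hy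
  simp [hy']

lemma pvGetC_pvSetC_ne {g : List (List Int)} {x y a b : Int}
    (h : a.toNat ≠ x.toNat ∨ b.toNat ≠ y.toNat) :
    pvGetC (pvSetC g x y) a b = pvGetC g a b := by
  unfold pvGetC pvSetC
  rw [List.getD_eq_getElem?_getD (l := g.modify _ _), List.getD_eq_getElem?_getD (l := g),
    List.getElem?_modify]
  rcases h with h | h
  · simp [Ne.symm h]
  · rcases eq_or_ne x.toNat a.toNat with hxa | hxa
    · simp only [hxa, if_true, Option.map_eq_map]
      rcases hg : g[a.toNat]? with _ | row
      · simp
      · simp only [Option.map_some, Option.getD_some]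
        rw [List.getD_eq_getElem?_getD, List.getD_eq_getElem?_getD, List.getElem?_set]
        simp [Ne.symm h]
    · simp [hxa]

lemma pvOkCount_set {n m : Int} {g : List (List Int)} {p : Int × Int}
    (h : pvOk n m g p) :
    pvOkCount n m g = pvOkCount n m (pvSetC g p.1 p.2) + 1 := by
  obtain ⟨h1, h2, h3, h4, h5⟩ := h
  have hc1 : ((p.1.toNat : Int)) = p.1 := Int.toNat_of_nonneg h1
  have hc2 : ((p.2.toNat : Int)) = p.2 := Int.toNat_of_nonneg h3
  unfold pvOkCount
  have hfe : (((Finset.range n.toNat) ×ˢ (Finset.range m.toNat)).filter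
        (fun q => pvGetC (pvSetC g p.1 p.2) (q.1 : Int) (q.2 : Int) ≠ 0)) =
      (((Finset.range n.toNat) ×ˢ (Finset.range m.toNat)).filter
        (fun q => pvGetC g (q.1 : Int) (q.2 : Int) ≠ 0)).erase (p.1.toNat, p.2.toNat) := by
    ext q
    simp only [Finset.mem_filter, Finset.mem_erase, Finset.mem_product, Finset.mem_range]
    rcases eq_or_ne q (p.1.toNat, p.2.toNat) with rfl | hne
    · have : pvGetC (pvSetC g p.1 p.2) ((p.1.toNat : Int)) ((p.2.toNat : Int)) = 0 := by
        rw [hc1, hc2]; exact pvGetC_pvSetC_self h5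
      constructor
      · rintro ⟨-, hg0⟩; exact absurd this hg0
      · rintro ⟨hww, -⟩; exact absurd rfl hww
    · have hne' : q.1 ≠ p.1.toNat ∨ q.2 ≠ p.2.toNat := by
        rcases q with ⟨q1, q2⟩
        by_cases hq : q1 = p.1.toNat
        · subst hq; right; intro h2'
          have hq2 : q2 = p.2.toNat := h2'
          subst hq2
          exact hne rfl
        · left; exact hq
      have : pvGetC (pvSetC g p.1 p.2) ((q.1 : Int)) ((q.2 : Int)) =
          pvGetC g ((q.1 : Int)) ((q.2 : Int)) := by
        apply pvGetC_pvSetC_ne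
        rcases hne' with hh | hh
        · left; simpa using fun he => hh (by omega)
        · right; simpa using fun he => hh (by omega)
      simp [this, hne]
  have hwmem : ((p.1.toNat, p.2.toNat) : Nat × Nat) ∈
      (((Finset.range n.toNat) ×ˢ (Finset.range m.toNat)).filter
        (fun q => pvGetC g (q.1 : Int) (q.2 : Int) ≠ 0)) := by
    simp only [Finset.mem_filter, Finset.mem_product, Finset.mem_range]
    refine ⟨⟨by omega, by omega⟩, ?_⟩
    rw [hc1, hc2]; exact h5
  rw [hfe, Finset.card_erase_of_mem hwmem]
  have hpos : 0 < (((Finset.range n.toNat) ×ˢ (Finset.range m.toNat)).filter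
      (fun q => pvGetC g (q.1 : Int) (q.2 : Int) ≠ 0)).card :=
    Finset.card_pos.mpr ⟨_, hwmem⟩
  omega

lemma pvStep_meas (n m : Int) (st : List (List Int) × List (Int × Int) × List Int × Int)
    (p : Int × Int) :
    2 * pvOkCount n m (pvStep n m st p).1 + (pvStep n m st p).2.1.length ≤
      2 * pvOkCount n m st.1 + st.2.1.length := by
  unfold pvStep
  split_ifs with h
  · have := pvOkCount_set (g := st.1) h
    simp only [List.length_append, List.length_cons, List.length_nil]
    omega
  · omega

lemma pvFoldl_meas (n m : Int) (cs : List (Int × Int)) :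
    ∀ st : List (List Int) × List (Int × Int) × List Int × Int,
      2 * pvOkCount n m (cs.foldl (pvStep n m) st).1 + (cs.foldl (pvStep n m) st).2.1.length ≤
        2 * pvOkCount n m st.1 + st.2.1.length := by
  induction cs with
  | nil => intro st; simp
  | cons p cs ih =>
    intro st
    have h1 := pvStep_meas n m st p
    have h2 := ih (pvStep n m st p)
    simp only [List.foldl_cons]
    omega

def pvDirs : List (Int × Int) := [(1, 0), (0, 1), (-1, 0), (0, -1)]

-- A's BFS: `while q: x, y = q.pop(0); for dx, dy in d: …` (pop from the FRONT)
def pvFindLoop (n m : Int) (g : List (List Int)) (q : List (Int × Int))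
    (v : List Int) (c : Int) : List (List Int) × List Int × Int :=
  match q with
  | [] => (g, v, c)
  | (x, y) :: qtl =>
    let st := pvDirs.foldl (fun s d => pvStep n m s (x + d.1, y + d.2)) (g, qtl, v, c)
    pvFindLoop n m st.1 st.2.1 st.2.2.1 st.2.2.2
termination_by 2 * pvOkCount n m g + q.length
decreasing_by
  have h := pvFoldl_meas n m (pvDirs.map (fun d => (x + d.1, y + d.2))) (g, qtl, v, c)
  rw [List.foldl_map] at h
  dsimp only at h
  simp only [List.length_cons]
  omega

-- one cell (i, j) of A's double scan: zero it, BFS from it, add c to oil[col] for col in v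
def pvCellA (n m : Int) (st : List (List Int) × List Int) (i j : Nat) :
    List (List Int) × List Int :=
  if pvGetC st.1 (i : Int) (j : Int) ≠ 0 then
    let r := pvFindLoop n m (pvSetC st.1 (i : Int) (j : Int))
      [((i : Int), (j : Int))] (PySem.Set.ofList [(j : Int)]) 1
    (r.1, r.2.1.foldl (fun o col => o.set col.toNat (o.getD col.toNat 0 + r.2.2)) st.2)
  else st

def solution (land : List (List Int)) : Int :=
  -- Python: n, m = len(land), len(land[0]) — IndexError on land = [], excluded by Pre_solution
  let n : Int := (land.length : Int)
  let m : Int := ((land.headD []).length : Int)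
  let res := (List.range land.length).foldl (fun st i =>
      (List.range (land.headD []).length).foldl (fun st j => pvCellA n m st i j) st)
    (land, List.replicate (land.headD []).length 0)
  match PySem.List.max? res.2 (fun x => x) with
  | some r => r
  | none => 0  -- Python max([]) raises ValueError (m = 0), excluded by Pre_solution

-- ===== PORT B =====
-- write value v at (x, y) (B stores relaxed labels; guarded like the reads)
def pvSetV (g : List (List Int)) (x y : Int) (v : Int) : List (List Int) :=
  g.modify x.toNat (fun row => row.set y.toNat v)

-- the four neighbours (i-1,j),(i+1,j),(i,j-1),(i,j+1)
def pvNbrs (i j : Int) : List (Int × Int) := [(i - 1, j), (i + 1, j), (i, j - 1), (i, j + 1)]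

-- lab = [[i*m+j if land[i][j] else -1 for j in range(m)] for i in range(n)]
def pvLabInit (land : List (List Int)) (nN mN : Nat) : List (List Int) :=
  (List.range nN).map (fun (i : Nat) => (List.range mN).map (fun (j : Nat) =>
    if pvGetC land (i : Int) (j : Int) ≠ 0 then ((i : Int) * (mN : Int) + (j : Int)) else -1))

-- one cell of a relaxation pass: r = min over self and valid oil neighbours;
-- write back (and report a change) only if it strictly decreased
def pvLabRelax (n m : Int) (lab : List (List Int)) (i j : Nat) :
    List (List Int) × Bool :=
  let r0 := pvGetC lab (i : Int) (j : Int)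
  if r0 ≠ -1 then
    let r := (pvNbrs (i : Int) (j : Int)).foldl (fun r p =>
      if 0 ≤ p.1 ∧ p.1 < n ∧ 0 ≤ p.2 ∧ p.2 < m ∧
          pvGetC lab p.1 p.2 ≠ -1 ∧ pvGetC lab p.1 p.2 < r
      then pvGetC lab p.1 p.2 else r) r0
    if r < r0 then (pvSetV lab (i : Int) (j : Int) r, true) else (lab, false)
  else (lab, false)

-- one full pass of the while-loop body (changed = False; for i … for j … )
def pvLabPass (n m : Int) (nN mN : Nat) (lab : List (List Int)) :
    List (List Int) × Bool :=
  (List.range nN).foldl (fun st i => (List.range mN).foldl (fun st j =>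
      let t := pvLabRelax n m st.1 i j
      (t.1, st.2 || t.2)) st) (lab, false)

-- Σ (entry+1).toNat : a changing pass strictly decreases it (labels stay ≥ -1),
-- so `pvLabMeasure lab0 + 1` fuel makes the Python while-loop structural
def pvLabMeasure (lab : List (List Int)) : Nat :=
  (lab.map (fun row => (row.map (fun x => (x + 1).toNat)).sum)).sum

def pvLabLoop (n m : Int) (nN mN : Nat) (fuel : Nat) (lab : List (List Int)) :
    List (List Int) :=
  match fuel with
  | 0 => lab
  | Nat.succ f =>
    let t := pvLabPass n m nN mN lab
    if t.2 then pvLabLoop n m nN mN f t.1 else t.1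

def solution_alt (land : List (List Int)) : Int :=
  let nN := land.length
  let mN := (land.headD []).length
  let lab0 := pvLabInit land nN mN
  let lab := pvLabLoop (nN : Int) (mN : Int) nN mN (pvLabMeasure lab0 + 1) lab0
  -- col_labels = [set() …]; sizes = [] ; scan all cells
  let agg := (List.range nN).foldl (fun st (i : Nat) => (List.range mN).foldl (fun st (j : Nat) =>
      let r := pvGetC lab (i : Int) (j : Int)
      if r ≠ -1 then (st.1.modify j (fun s => PySem.Set.add s r), st.2 ++ [r]) else st) st)
    (List.replicate mN ([] : List Int), ([] : List Int))
  -- best = max over columns of sum(1 for r in sizes if r in col_labels[c])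
  (List.range mN).foldl (fun best c =>
    max best (agg.2.foldl (fun t r => if r ∈ agg.1.getD c [] then t + 1 else t) (0 : Int))) 0

-- ===== PRECONDITION & SPEC =====
-- Pre_solution holds exactly where Python A returns: it raises IndexError on land = []
-- and on a row shorter than len(land[0]), and ValueError (max of empty) when len(land[0]) = 0.
def Pre_solution (land : List (List Int)) : Prop :=
  land ≠ [] ∧ 0 < (land.headD []).length ∧ ∀ row ∈ land, (land.headD []).length ≤ row.length
instance (land : List (List Int)) : Decidable (Pre_solution land) := by
  unfold Pre_solution; infer_instance

def pvWitness_solution : List (List Int) := [[1, 0], [0, 1]]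

def Spec_solution (land : List (List Int)) (out : Int) : Prop := out = solution_alt land
instance (land : List (List Int)) (out : Int) : Decidable (Spec_solution land out) := by
  unfold Spec_solution; infer_instance

-- ===== CLAIM (what is proved, stated in full; the proofs are below) =====
def Claim_equal_solution : Prop :=
  ∀ (land : List (List Int)), Dom_solution land → Pre_solution land →
    Spec_solution land (solution land)

-- ===== LEMMAS AND PROOFS =====


-- reachability through still-nonzero in-window cells: the spec A's loop is proved against
def pvAdj (p q : Int × Int) : Prop := (q.1 - p.1).natAbs + (q.2 - p.2).natAbs = 1

def pvEdge (n m : Int) (g : List (List Int)) (p q : Int × Int) : Prop :=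
  pvAdj p q ∧ pvOk n m g q

def pvNew (n m : Int) (g : List (List Int)) (src : List (Int × Int)) : Set (Int × Int) :=
  {c | ∃ s ∈ src, Relation.TransGen (pvEdge n m g) s c}

-- "g' is g with exactly the cells of S zeroed" (shapes preserved, S cells 0, rest untouched)
def pvZeroed (g g' : List (List Int)) (S : Set (Int × Int)) : Prop :=
  g'.length = g.length ∧
  (∀ i : Nat, (g'.getD i []).length = (g.getD i []).length) ∧
  ∀ x y : Int, 0 ≤ x → 0 ≤ y →
    (((x, y) ∈ S → pvGetC g' x y = 0) ∧ ((x, y) ∉ S → pvGetC g' x y = pvGetC g x y))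

lemma pvZeroed_refl (g : List (List Int)) : pvZeroed g g ∅ :=
  ⟨rfl, fun _ => rfl, fun _ _ _ _ => ⟨by simp, fun _ => rfl⟩⟩

lemma pvZeroed_trans {g g1 g2 : List (List Int)} {S T : Set (Int × Int)}
    (h1 : pvZeroed g g1 S) (h2 : pvZeroed g1 g2 T) : pvZeroed g g2 (S ∪ T) := by
  refine ⟨h2.1.trans h1.1, fun i => (h2.2.1 i).trans (h1.2.1 i), fun x y hx hy => ⟨?_, ?_⟩⟩
  · rintro (hm | hm)
    · by_cases ht : (x, y) ∈ T
      · exact ((h2.2.2 x y hx hy).1 ht)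
      · rw [(h2.2.2 x y hx hy).2 ht]; exact (h1.2.2 x y hx hy).1 hm
    · exact (h2.2.2 x y hx hy).1 hm
  · intro hm
    rw [(h2.2.2 x y hx hy).2 (fun ht => hm (Or.inr ht)),
      (h1.2.2 x y hx hy).2 (fun hs => hm (Or.inl hs))]

lemma pvOk_zeroed_iff {n m : Int} {g g' : List (List Int)} {S : Set (Int × Int)}
    {p : Int × Int} (hz : pvZeroed g g' S) (hp : p ∉ S) :
    pvOk n m g' p ↔ pvOk n m g p := by
  have hp' : (p.1, p.2) ∉ S := by simpa using hp
  constructor <;> rintro ⟨a1, a2, a3, a4, a5⟩ <;> refine ⟨a1, a2, a3, a4, ?_⟩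
  · rw [← (hz.2.2 p.1 p.2 a1 a3).2 hp']; exact a5
  · rw [(hz.2.2 p.1 p.2 a1 a3).2 hp']; exact a5

lemma pvOk_zeroed_false {n m : Int} {g g' : List (List Int)} {S : Set (Int × Int)}
    {p : Int × Int} (hz : pvZeroed g g' S) (hp : p ∈ S) : ¬ pvOk n m g' p := by
  rintro ⟨a1, a2, a3, a4, a5⟩
  exact a5 ((hz.2.2 p.1 p.2 a1 a3).1 (by simpa using hp))

lemma pvEdge_mono {n m : Int} {g g' : List (List Int)} {S : Set (Int × Int)}
    (hz : pvZeroed g g' S) {p q : Int × Int} (h : pvEdge n m g' p q) : pvEdge n m g p q := by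
  refine ⟨h.1, ?_⟩
  by_cases hq : q ∈ S
  · exact absurd h.2 (pvOk_zeroed_false hz hq)
  · exact (pvOk_zeroed_iff hz hq).1 h.2

lemma pvTrans_mono {n m : Int} {g g' : List (List Int)} {S : Set (Int × Int)}
    (hz : pvZeroed g g' S) {s c : Int × Int}
    (h : Relation.TransGen (pvEdge n m g') s c) : Relation.TransGen (pvEdge n m g) s c :=
  Relation.TransGen.mono (fun _ _ => pvEdge_mono hz) h

-- the crux: a path in g either ends in the freshly-zeroed cells ns, or survives in g'
lemma pvSplit {n m : Int} {g g' : List (List Int)} {ns : List (Int × Int)}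
    (hz : pvZeroed g g' {p | p ∈ ns}) {s c : Int × Int}
    (h : Relation.TransGen (pvEdge n m g) s c) :
    c ∈ ns ∨ Relation.TransGen (pvEdge n m g') s c ∨
      ∃ x ∈ ns, Relation.TransGen (pvEdge n m g') x c := by
  induction h with
  | @single b hb =>
    by_cases hcn : b ∈ ns
    · exact Or.inl hcn
    · exact Or.inr (Or.inl (Relation.TransGen.single
        ⟨hb.1, (pvOk_zeroed_iff hz hcn).2 hb.2⟩))
  | @tail b c' hpath hstep ih =>
    by_cases hcn : c' ∈ ns
    · exact Or.inl hcn
    · have hedge : pvEdge n m g' b c' := ⟨hstep.1, (pvOk_zeroed_iff hz hcn).2 hstep.2⟩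
      rcases ih with hb | hp | ⟨x, hx, px⟩
      · exact Or.inr (Or.inr ⟨b, hb, Relation.TransGen.single hedge⟩)
      · exact Or.inr (Or.inl (hp.tail hedge))
      · exact Or.inr (Or.inr ⟨x, hx, px.tail hedge⟩)

lemma pvNew_decomp {n m : Int} {g g' : List (List Int)} {a : Int × Int}
    {ns q : List (Int × Int)} (hmem : ∀ p, p ∈ ns ↔ pvEdge n m g a p)
    (hz : pvZeroed g g' {p | p ∈ ns}) :
    pvNew n m g (a :: q) = {p | p ∈ ns} ∪ pvNew n m g' (q ++ ns) := by
  ext c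
  simp only [pvNew, Set.mem_union, Set.mem_setOf_eq, List.mem_cons, List.mem_append]
  constructor
  · rintro ⟨s, hs | hs, hp⟩
    · subst hs
      rcases Relation.TransGen.head'_iff.mp hp with ⟨b, hab, hbc⟩
      have hbns : b ∈ ns := (hmem b).2 hab
      rcases Relation.reflTransGen_iff_eq_or_transGen.mp hbc with rfl | hbc'
      · exact Or.inl hbns
      · rcases pvSplit hz hbc' with hc | hp' | ⟨x, hx, px⟩
        · exact Or.inl hc
        · exact Or.inr ⟨b, Or.inr hbns, hp'⟩
        · exact Or.inr ⟨x, Or.inr hx, px⟩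
    · rcases pvSplit hz hp with hc | hp' | ⟨x, hx, px⟩
      · exact Or.inl hc
      · exact Or.inr ⟨s, Or.inl hs, hp'⟩
      · exact Or.inr ⟨x, Or.inr hx, px⟩
  · rintro (hc | ⟨s, hs, hp⟩)
    · exact ⟨a, Or.inl rfl, Relation.TransGen.single ((hmem c).1 hc)⟩
    · have hp' := pvTrans_mono hz hp
      rcases hs with hs | hs
      · exact ⟨s, Or.inr hs, hp'⟩
      · exact ⟨a, Or.inl rfl, Relation.TransGen.head ((hmem s).1 hs) hp'⟩

lemma pvNew_ok {n m : Int} {g : List (List Int)} {src : List (Int × Int)} {c : Int × Int}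
    (h : c ∈ pvNew n m g src) : pvOk n m g c := by
  obtain ⟨s, _, hp⟩ := h
  induction hp with
  | single hstep => exact hstep.2
  | tail _ hstep _ => exact hstep.2

lemma pvNew_finite {n m : Int} {g : List (List Int)} {src : List (Int × Int)} :
    (pvNew n m g src).Finite := by
  apply Set.Finite.subset (Set.finite_Icc ((0 : Int), (0 : Int)) (n - 1, m - 1))
  intro c hc
  have hok := pvNew_ok hc
  simp only [Set.mem_Icc, Prod.le_def]
  obtain ⟨a1, a2, a3, a4, _⟩ := hok
  exact ⟨⟨a1, a3⟩, by omega, by omega⟩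

lemma pvList_set_ncard {ns : List (Int × Int)} (h : ns.Nodup) :
    ({p | p ∈ ns} : Set (Int × Int)).ncard = ns.length := by
  have he : ({p | p ∈ ns} : Set (Int × Int)) = ↑ns.toFinset := by ext; simp
  rw [he, Set.ncard_coe_finset, List.toFinset_card_of_nodup h]

lemma pvNew_decomp_ncard {n m : Int} {g g' : List (List Int)} {a : Int × Int}
    {ns q : List (Int × Int)} (hmem : ∀ p, p ∈ ns ↔ pvEdge n m g a p)
    (hz : pvZeroed g g' {p | p ∈ ns}) (hnd : ns.Nodup) :
    (pvNew n m g (a :: q)).ncard = ns.length + (pvNew n m g' (q ++ ns)).ncard := by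
  rw [pvNew_decomp hmem hz]
  rw [Set.ncard_union_eq ?hdis (List.finite_toSet ns) pvNew_finite, pvList_set_ncard hnd]
  case hdis =>
    rw [Set.disjoint_left]
    intro x hx hx'
    exact pvOk_zeroed_false hz hx (pvNew_ok hx')

lemma pvZeroed_setC {g : List (List Int)} {p : Int × Int} (h1 : 0 ≤ p.1) (h2 : 0 ≤ p.2)
    (h5 : pvGetC g p.1 p.2 ≠ 0) : pvZeroed g (pvSetC g p.1 p.2) {p} := by
  refine ⟨by simp [pvSetC], ?_, ?_⟩
  · intro i
    unfold pvSetC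
    rw [List.getD_eq_getElem?_getD, List.getD_eq_getElem?_getD, List.getElem?_modify]
    rcases hgi : g[i]? with _ | row
    · simp
    · simp only [Option.map_eq_map, Option.map_some, Option.getD_some]
      split <;> simp
  · intro x y hx hy
    constructor
    · rintro hm
      have : (x, y) = p := hm
      rw [show x = p.1 from congrArg Prod.fst this, show y = p.2 from congrArg Prod.snd this]
      exact pvGetC_pvSetC_self h5
    · intro hm
      apply pvGetC_pvSetC_ne
      have hne : x ≠ p.1 ∨ y ≠ p.2 := by
        by_cases hxp : x = p.1
        · right; intro hyp; exact hm (by simp [hxp, hyp])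
        · left; exact hxp
      rcases hne with hh | hh
      · left; omega
      · right; omega

-- the per-cell bookkeeping fold, characterised against the filter of fresh ok cells
lemma pvStep_foldl (n m : Int) (cs : List (Int × Int)) :
    ∀ (g : List (List Int)) (q0 : List (Int × Int)) (v : List Int) (c : Int), cs.Nodup →
      pvZeroed g (cs.foldl (pvStep n m) (g, q0, v, c)).1
          {p | p ∈ cs.filter (fun p => decide (pvOk n m g p))} ∧
        (cs.foldl (pvStep n m) (g, q0, v, c)).2.1 =
          q0 ++ cs.filter (fun p => decide (pvOk n m g p)) ∧
        (∀ t, t ∈ (cs.foldl (pvStep n m) (g, q0, v, c)).2.2.1 ↔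
          t ∈ v ∨ ∃ p ∈ cs.filter (fun p => decide (pvOk n m g p)), p.2 = t) ∧
        (cs.foldl (pvStep n m) (g, q0, v, c)).2.2.2 =
          c + ((cs.filter (fun p => decide (pvOk n m g p))).length : Int) ∧
        (v.Nodup → (cs.foldl (pvStep n m) (g, q0, v, c)).2.2.1.Nodup) := by
  induction cs with
  | nil =>
    intro g q0 v c _
    refine ⟨by simpa using pvZeroed_refl g, by simp, by simp, by simp, fun h => h⟩
  | cons p cs ih =>
    intro g q0 v c hnd
    have hndcs : cs.Nodup := hnd.of_cons
    have hpcs : p ∉ cs := by simp [List.nodup_cons] at hnd; exact hnd.1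
    by_cases hok : pvOk n m g p
    · have hstep : pvStep n m (g, q0, v, c) p =
          (pvSetC g p.1 p.2, q0 ++ [p], PySem.Set.add v p.2, c + 1) := by
        unfold pvStep; rw [if_pos hok]
      have hz1 : pvZeroed g (pvSetC g p.1 p.2) {p} :=
        pvZeroed_setC hok.1 hok.2.2.1 hok.2.2.2.2
      have hfilt : cs.filter (fun t => decide (pvOk n m (pvSetC g p.1 p.2) t)) =
          cs.filter (fun t => decide (pvOk n m g t)) := by
        apply List.filter_congr
        intro t ht
        have htp : t ∉ ({p} : Set (Int × Int)) := by
          simp only [Set.mem_singleton_iff]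
          intro he; exact hpcs (he ▸ ht)
        simp only [decide_eq_decide]
        exact pvOk_zeroed_iff hz1 htp
      have ihh := ih (pvSetC g p.1 p.2) (q0 ++ [p]) (PySem.Set.add v p.2) (c + 1) hndcs
      rw [hfilt] at ihh
      obtain ⟨ihz, ihq, ihv, ihc, ihnd⟩ := ihh
      have hfull : (p :: cs).filter (fun t => decide (pvOk n m g t)) =
          p :: cs.filter (fun t => decide (pvOk n m g t)) := by
        simp [hok]
      simp only [List.foldl_cons, hstep]
      refine ⟨?_, ?_, ?_, ?_, ?_⟩
      · have := pvZeroed_trans hz1 ihz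
        rw [hfull]
        convert this using 1
        ext t
        simp
      · rw [ihq, hfull]; simp
      · intro t
        rw [ihv t, hfull]
        simp only [PySem.Set.mem_add, List.mem_cons]
        constructor
        · rintro ((hv | he) | ⟨x, hx, hxe⟩)
          · exact Or.inl hv
          · exact Or.inr ⟨p, Or.inl rfl, he.symm⟩
          · exact Or.inr ⟨x, Or.inr hx, hxe⟩
        · rintro (hv | ⟨x, hx | hx, hxe⟩)
          · exact Or.inl (Or.inl hv)
          · exact Or.inl (Or.inr (by rw [hx] at hxe; exact hxe.symm))
          · exact Or.inr ⟨x, hx, hxe⟩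
      · rw [ihc, hfull]; simp; ring
      · intro hv; exact ihnd (PySem.Set.nodup_add _ _ hv)
    · have hstep : pvStep n m (g, q0, v, c) p = (g, q0, v, c) := by
        unfold pvStep; rw [if_neg hok]
      have hfull : (p :: cs).filter (fun t => decide (pvOk n m g t)) =
          cs.filter (fun t => decide (pvOk n m g t)) := by
        simp [hok]
      simp only [List.foldl_cons, hstep, hfull]
      exact ih g q0 v c hndcs

lemma pvCandsA_nodup (x y : Int) : (pvDirs.map (fun d => (x + d.1, y + d.2))).Nodup := by
  simp [pvDirs, Prod.ext_iff]

lemma pvCandsA_mem (x y : Int) (p : Int × Int) :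
    p ∈ pvDirs.map (fun d => (x + d.1, y + d.2)) ↔ pvAdj (x, y) p := by
  rcases p with ⟨a, b⟩
  simp [pvDirs, pvAdj, Prod.ext_iff]
  omega

lemma pvNbrs_mem (x y : Int) (p : Int × Int) :
    p ∈ pvNbrs x y ↔ pvAdj (x, y) p := by
  rcases p with ⟨a, b⟩
  simp [pvNbrs, pvAdj, Prod.ext_iff]
  omega

lemma pvNew_nil (n m : Int) (g : List (List Int)) : pvNew n m g [] = ∅ := by
  simp [pvNew]

lemma pvFilter_mem {n m : Int} {g : List (List Int)} {cands : List (Int × Int)} {a : Int × Int}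
    (hc : ∀ p, p ∈ cands ↔ pvAdj a p) (t : Int × Int) :
    t ∈ cands.filter (fun p => decide (pvOk n m g p)) ↔ pvEdge n m g a t := by
  simp only [List.mem_filter, decide_eq_true_eq, pvEdge]
  rw [hc]

theorem pvFindLoop_spec (n m : Int) (g : List (List Int)) (q : List (Int × Int))
    (v : List Int) (c : Int) :
    pvZeroed g (pvFindLoop n m g q v c).1 (pvNew n m g q) ∧
    (∀ t, t ∈ (pvFindLoop n m g q v c).2.1 ↔ t ∈ v ∨ ∃ p ∈ pvNew n m g q, p.2 = t) ∧
    (pvFindLoop n m g q v c).2.2 = c + ((pvNew n m g q).ncard : Int) ∧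
    (v.Nodup → (pvFindLoop n m g q v c).2.1.Nodup) := by
  induction g, q, v, c using pvFindLoop.induct n m with
  | case1 g v c =>
    rw [pvFindLoop, pvNew_nil]
    exact ⟨pvZeroed_refl g, by simp, by simp, fun h => h⟩
  | case2 g v c x y qtl st ih =>
    rw [pvFindLoop]
    have hnd := pvCandsA_nodup x y
    have hfold := pvStep_foldl n m (pvDirs.map (fun d => (x + d.1, y + d.2))) g qtl v c hnd
    rw [List.foldl_map] at hfold
    obtain ⟨hz, hq, hv, hc, hvnd⟩ := hfold
    have hst : st = List.foldl (fun s d => pvStep n m s (x + d.1, y + d.2)) (g, qtl, v, c) pvDirs :=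
      rfl
    rw [hst] at ih
    rw [hq] at ih
    rw [hq]
    obtain ⟨ihz, ihv, ihc, ihnd⟩ := ih
    have hmem : ∀ t, t ∈ (pvDirs.map (fun d => (x + d.1, y + d.2))).filter
        (fun p => decide (pvOk n m g p)) ↔ pvEdge n m g (x, y) t :=
      pvFilter_mem (pvCandsA_mem x y)
    have hdec := pvNew_decomp (q := qtl) hmem hz
    have hdecn := pvNew_decomp_ncard (q := qtl) hmem hz (hnd.filter _)
    refine ⟨?_, ?_, ?_, ?_⟩
    · rw [hdec]
      exact pvZeroed_trans hz ihz
    · intro t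
      rw [ihv t, hv t, hdec]
      simp only [Set.mem_union, Set.mem_setOf_eq]
      constructor
      · rintro ((h | ⟨p, hp, he⟩) | ⟨p, hp, he⟩)
        exacts [Or.inl h, Or.inr ⟨p, Or.inl hp, he⟩, Or.inr ⟨p, Or.inr hp, he⟩]
      · rintro (h | ⟨p, hp | hp, he⟩)
        exacts [Or.inl (Or.inl h), Or.inl (Or.inr ⟨p, hp, he⟩), Or.inr ⟨p, hp, he⟩]
    · rw [ihc, hc, hdecn]
      push_cast
      ring
    · exact fun hv' => ihnd (hvnd hv')

lemma pvOilUpdate (c : Int) : ∀ (L : List Int) (o : List Int), L.Nodup →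
    (∀ t ∈ L, 0 ≤ t ∧ t < (o.length : Int)) →
    (L.foldl (fun o col => o.set col.toNat (o.getD col.toNat 0 + c)) o).length = o.length ∧
    ∀ k : Nat, k < o.length →
      (L.foldl (fun o col => o.set col.toNat (o.getD col.toNat 0 + c)) o).getD k 0 =
        o.getD k 0 + (if (k : Int) ∈ L then c else 0) := by
  intro L
  induction L with
  | nil => intro o _ _; simp
  | cons col0 L ih =>
    intro o hnd hb
    have h0 := hb col0 List.mem_cons_self
    have hbound : col0.toNat < o.length := by omega
    have hnotmem : col0 ∉ L := by
      simp only [List.nodup_cons] at hnd; exact hnd.1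
    have hlen1 : (o.set col0.toNat (o.getD col0.toNat 0 + c)).length = o.length := by simp
    obtain ⟨ihlen, ihget⟩ := ih (o.set col0.toNat (o.getD col0.toNat 0 + c)) hnd.of_cons
      (by intro t ht; have := hb t (List.mem_cons_of_mem _ ht); omega)
    simp only [List.foldl_cons]
    constructor
    · rw [ihlen, hlen1]
    · intro k hk
      rw [ihget k (by omega)]
      have hgo1 : (o.set col0.toNat (o.getD col0.toNat 0 + c)).getD k 0 =
          if col0.toNat = k then o.getD col0.toNat 0 + c else o.getD k 0 := by
        rw [List.getD_eq_getElem?_getD, List.getElem?_set]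
        split_ifs <;> simp [List.getD_eq_getElem?_getD]
      rw [hgo1]
      rcases eq_or_ne k col0.toNat with he | he
      · have hke : (k : Int) = col0 := by omega
        have hmem1 : (k : Int) ∈ col0 :: L := by rw [hke]; exact List.mem_cons_self
        have hmem2 : (k : Int) ∉ L := by rw [hke]; exact hnotmem
        rw [if_pos he.symm, if_neg hmem2, if_pos hmem1, he]
        ring
      · have hke : (k : Int) ≠ col0 := by omega
        rw [if_neg (fun hcc => he hcc.symm)]
        have hml : ((k : Int) ∈ col0 :: L) ↔ ((k : Int) ∈ L) := by
          simp [List.mem_cons, hke]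
        simp only [hml]

-- max(oil) as A computes it equals the running max over nonnegative entries
lemma pvMaxMatch (l : List Int) (hne : l ≠ []) (hnn : ∀ x ∈ l, 0 ≤ x) :
    (match PySem.List.max? l (fun x => x) with | some r => r | none => 0) = l.foldl max 0 := by
  cases l with
  | nil => simp at hne
  | cons a t =>
    rw [PySem.List.max?_id_cons]
    show t.foldl max a = (a :: t).foldl max 0
    simp only [List.foldl_cons]
    rw [max_eq_right (hnn a List.mem_cons_self)]


-- ===== connected components of the ORIGINAL grid =====
def pvComp (n m : Int) (land : List (List Int)) (w : Int × Int) : Set (Int × Int) :=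
  insert w (pvNew n m land [w])

lemma pvMem_comp {n m : Int} {land : List (List Int)} {w c : Int × Int} :
    c ∈ pvComp n m land w ↔ c = w ∨ Relation.TransGen (pvEdge n m land) w c := by
  simp [pvComp, pvNew]

lemma pvAdj_symm {p q : Int × Int} (h : pvAdj p q) : pvAdj q p := by
  unfold pvAdj at *; omega

lemma pvTransGen_ok {n m : Int} {land : List (List Int)} {w c : Int × Int}
    (h : Relation.TransGen (pvEdge n m land) w c) : pvOk n m land c := by
  induction h with
  | single hstep => exact hstep.2
  | tail _ hstep _ => exact hstep.2

lemma pvTransGen_symm {n m : Int} {land : List (List Int)} {w c : Int × Int}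
    (hw : pvOk n m land w) (h : Relation.TransGen (pvEdge n m land) w c) :
    Relation.TransGen (pvEdge n m land) c w := by
  induction h with
  | @single b hb => exact Relation.TransGen.single ⟨pvAdj_symm hb.1, hw⟩
  | @tail b c' hpath hstep ih =>
    exact Relation.TransGen.head ⟨pvAdj_symm hstep.1, pvTransGen_ok hpath⟩ ih

lemma pvComp_self {n m : Int} {land : List (List Int)} (w : Int × Int) :
    w ∈ pvComp n m land w := pvMem_comp.mpr (Or.inl rfl)

lemma pvComp_oil {n m : Int} {land : List (List Int)} {w c : Int × Int}
    (hw : pvOk n m land w) (hc : c ∈ pvComp n m land w) : pvOk n m land c := by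
  rcases pvMem_comp.mp hc with rfl | h
  · exact hw
  · exact pvTransGen_ok h

lemma pvComp_eq_of_mem {n m : Int} {land : List (List Int)} {w c : Int × Int}
    (hw : pvOk n m land w) (hc : c ∈ pvComp n m land w) :
    pvComp n m land c = pvComp n m land w := by
  rcases pvMem_comp.mp hc with rfl | t
  · rfl
  · ext d
    rw [pvMem_comp, pvMem_comp]
    constructor
    · rintro (rfl | h)
      · exact Or.inr t
      · exact Or.inr (t.trans h)
    · rintro (rfl | h)
      · exact Or.inr (pvTransGen_symm hw t)
      · rcases eq_or_ne d c with rfl | hne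
        · exact Or.inl rfl
        · exact Or.inr ((pvTransGen_symm hw t).trans h)

lemma pvComp_finite {n m : Int} {land : List (List Int)} {w : Int × Int} :
    (pvComp n m land w).Finite := Set.Finite.insert _ pvNew_finite

def pvTouch (n m : Int) (land : List (List Int)) (w : Int × Int) (col : Int) : Prop :=
  ∃ q ∈ pvComp n m land w, q.2 = col

-- ===== component of a partially-zeroed grid = component of the original =====
def pvOilSet (n m : Int) (land : List (List Int)) : Set (Int × Int) :=
  {c | pvOk n m land c}

def pvClosed (n m : Int) (land : List (List Int)) (Z : Set (Int × Int)) : Prop :=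
  ∀ c ∈ Z, pvComp n m land c ⊆ Z

lemma pvComp_disjoint_closed {n m : Int} {land : List (List Int)} {Z : Set (Int × Int)}
    (hcl : pvClosed n m land Z) {w : Int × Int} (hw : pvOk n m land w) (hwZ : w ∉ Z) :
    ∀ t ∈ pvComp n m land w, t ∉ Z := by
  intro t ht htZ
  exact hwZ (by
    have h1 : pvComp n m land t = pvComp n m land w := pvComp_eq_of_mem hw ht
    have := hcl t htZ
    rw [h1] at this
    exact this (pvComp_self w))

lemma pvCompZero {n m : Int} {land g : List (List Int)} {Z : Set (Int × Int)}
    (hcl : pvClosed n m land Z) (hz : pvZeroed land g Z) {w : Int × Int}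
    (hw : pvOk n m land w) (hwZ : w ∉ Z) :
    pvNew n m (pvSetC g w.1 w.2) [w] = pvComp n m land w \ {w} := by
  have hgw : pvGetC g w.1 w.2 ≠ 0 := by
    rw [(hz.2.2 w.1 w.2 hw.1 hw.2.2.1).2 (by simpa using hwZ)]
    exact hw.2.2.2.2
  have hz1 : pvZeroed land (pvSetC g w.1 w.2) (Z ∪ {w}) :=
    pvZeroed_trans hz (pvZeroed_setC hw.1 hw.2.2.1 hgw)
  have hdisj := pvComp_disjoint_closed hcl hw hwZ
  have hokg1 : ∀ t ∈ pvComp n m land w, t ≠ w → pvOk n m (pvSetC g w.1 w.2) t := by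
    intro t ht htw
    have htZ : t ∉ Z ∪ {w} := by
      rintro (h | h)
      · exact hdisj t ht h
      · exact htw h
    exact (pvOk_zeroed_iff hz1 htZ).2 (pvComp_oil hw ht)
  ext c
  simp only [pvNew, Set.mem_setOf_eq, List.mem_singleton, Set.mem_diff,
    Set.mem_singleton_iff]
  constructor
  · rintro ⟨s, hs, hp⟩
    rw [hs] at hp
    have hcok : pvOk n m (pvSetC g w.1 w.2) c := pvTransGen_ok hp
    have hcw : c ≠ w := by
      rintro rfl
      exact pvOk_zeroed_false hz1 (Or.inr rfl) hcok
    exact ⟨pvMem_comp.mpr (Or.inr (pvTrans_mono hz1 hp)), hcw⟩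
  · rintro ⟨hc, hcw⟩
    rcases pvMem_comp.mp hc with rfl | h
    · exact absurd rfl hcw
    · refine ⟨w, rfl, ?_⟩
      clear hc
      induction h with
      | @single b hb =>
        exact Relation.TransGen.single ⟨hb.1,
          hokg1 b (pvMem_comp.mpr (Or.inr (Relation.TransGen.single hb))) hcw⟩
      | @tail b c' hpath hstep ih =>
        have hc'mem : c' ∈ pvComp n m land w :=
          pvMem_comp.mpr (Or.inr (hpath.tail hstep))
        by_cases hbw : b = w
        · subst hbw
          exact Relation.TransGen.single ⟨hstep.1, hokg1 c' hc'mem hcw⟩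
        · exact (ih hbw).tail ⟨hstep.1, hokg1 c' hc'mem hcw⟩


-- ===== A's double scan: invariant =====
noncomputable def pvNcol (n m : Int) (land : List (List Int)) (Z : Set (Int × Int)) (col : Int) : Int :=
  ((Z ∩ {c | pvTouch n m land c col}).ncard : Int)

def pvInvA (n m : Int) (land : List (List Int)) (mN : Nat) (Z : Set (Int × Int))
    (st : List (List Int) × List Int) : Prop :=
  Z ⊆ pvOilSet n m land ∧ pvClosed n m land Z ∧ pvZeroed land st.1 Z ∧
  st.2.length = mN ∧ ∀ col : Nat, col < mN → st.2.getD col 0 = pvNcol n m land Z (col : Int)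

lemma pvOilSet_finite {n m : Int} {land : List (List Int)} :
    (pvOilSet n m land).Finite := by
  apply Set.Finite.subset (Set.finite_Icc ((0 : Int), (0 : Int)) (n - 1, m - 1))
  rintro c ⟨a1, a2, a3, a4, -⟩
  simp only [Set.mem_Icc, Prod.le_def]
  exact ⟨⟨a1, a3⟩, by omega, by omega⟩

lemma pvCellA_inv {n m : Int} {land : List (List Int)} {mN : Nat}
    (hm : m = (mN : Int)) {Z : Set (Int × Int)} {st : List (List Int) × List Int}
    (hinv : pvInvA n m land mN Z st) (i j : Nat) (hi : (i : Int) < n) (hj : j < mN) :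
    ∃ Z', pvInvA n m land mN Z' (pvCellA n m st i j) ∧ Z ⊆ Z' ∧
      (((i : Int), (j : Int)) ∈ pvOilSet n m land → ((i : Int), (j : Int)) ∈ Z') := by
  obtain ⟨hsub, hcl, hz, hlen, hcol⟩ := hinv
  by_cases h0 : pvGetC st.1 (i : Int) (j : Int) ≠ 0
  · -- fresh oil cell: A zeroes it and BFS-fills its whole component
    set r := pvFindLoop n m (pvSetC st.1 (i : Int) (j : Int))
      [((i : Int), (j : Int))] (PySem.Set.ofList [(j : Int)]) 1 with hrdef
    have hcell : pvCellA n m st i j =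
        (r.1, r.2.1.foldl (fun o col => o.set col.toNat (o.getD col.toNat 0 + r.2.2)) st.2) := by
      simp only [pvCellA]
      rw [if_pos h0]
    set w : Int × Int := ((i : Int), (j : Int)) with hwdef
    have hwZ : w ∉ Z := by
      intro hmem
      exact h0 ((hz.2.2 (i : Int) (j : Int) (by positivity) (by positivity)).1 hmem)
    have hlw : pvGetC land (i : Int) (j : Int) ≠ 0 := by
      rw [← (hz.2.2 (i : Int) (j : Int) (by positivity) (by positivity)).2
        (by simpa using hwZ)]
      exact h0
    have hw : pvOk n m land w := by
      rw [hwdef]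
      exact ⟨by positivity, hi, by positivity, by omega, hlw⟩
    have hnew := pvCompZero hcl hz hw hwZ
    obtain ⟨fz, fv, fc, fnd⟩ := pvFindLoop_spec n m (pvSetC st.1 (i : Int) (j : Int))
      [((i : Int), (j : Int))] (PySem.Set.ofList [(j : Int)]) 1
    rw [← hrdef] at fz fv fc fnd
    rw [hnew] at fz fv fc
    refine ⟨Z ∪ pvComp n m land w, ?_, fun c hc => Or.inl hc, fun _ => Or.inr (pvComp_self w)⟩
    have hdisj := pvComp_disjoint_closed hcl hw hwZ
    -- the v-set records exactly the columns the component touches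
    have hvchar : ∀ t, t ∈ r.2.1 ↔ pvTouch n m land w t := by
      intro t
      rw [fv t]
      constructor
      · rintro (ht | ⟨p, hp, hpe⟩)
        · have : t = (j : Int) := by simpa [PySem.Set.mem_ofList] using ht
          exact ⟨w, pvComp_self w, by simp [hwdef, this]⟩
        · exact ⟨p, hp.1, hpe⟩
      · rintro ⟨q, hq, hqe⟩
        by_cases hqw : q = w
        · subst hqw
          left
          simp [PySem.Set.mem_ofList, ← hqe, hwdef]
        · exact Or.inr ⟨q, ⟨hq, hqw⟩, hqe⟩
    -- the counter is the component size
    have hfc : r.2.2 = ((pvComp n m land w).ncard : Int) := by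
      rw [fc]
      have := Set.ncard_diff_singleton_add_one (pvComp_self (n := n) (m := m) (land := land) w) (pvComp_finite (n := n) (m := m) (land := land) (w := w))
      omega
    -- the new grid is land zeroed on Z ∪ comp
    have hzg : pvZeroed land r.1 (Z ∪ pvComp n m land w) := by
      have hgw : pvGetC st.1 w.1 w.2 ≠ 0 := h0
      have h1 : pvZeroed land (pvSetC st.1 (i : Int) (j : Int)) (Z ∪ {w}) :=
        pvZeroed_trans hz (pvZeroed_setC hw.1 hw.2.2.1 hgw)
      have h2 := pvZeroed_trans h1 fz
      have : (Z ∪ {w}) ∪ (pvComp n m land w \ {w}) = Z ∪ pvComp n m land w := by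
        ext d
        simp only [Set.mem_union, Set.mem_diff, Set.mem_singleton_iff]
        constructor
        · rintro ((h | h) | ⟨h, -⟩)
          · exact Or.inl h
          · exact Or.inr (by rw [h]; exact pvComp_self w)
          · exact Or.inr h
        · rintro (h | h)
          · exact Or.inl (Or.inl h)
          · by_cases hdw : d = w
            · exact Or.inl (Or.inr hdw)
            · exact Or.inr ⟨h, hdw⟩
      rwa [this] at h2
    -- oil array update
    have hvb : ∀ t ∈ r.2.1, 0 ≤ t ∧ t < (st.2.length : Int) := by
      intro t ht
      obtain ⟨q, hq, hqe⟩ := (hvchar t).mp ht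
      obtain ⟨-, -, hq3, hq4, -⟩ := pvComp_oil hw hq
      rw [hlen, ← hqe]
      exact ⟨hq3, by omega⟩
    have hvnd : r.2.1.Nodup := fnd (PySem.Set.nodup_ofList _)
    obtain ⟨hulen, huget⟩ := pvOilUpdate r.2.2 r.2.1 st.2 hvnd hvb
    have hcompdisj : Disjoint Z (pvComp n m land w) := by
      rw [Set.disjoint_right]
      intro t ht
      exact hdisj t ht
    rw [hcell]
    refine ⟨?_, ?_, ?_, ?_, ?_⟩
    · rintro c (hc | hc)
      · exact hsub hc
      · exact pvComp_oil hw hc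
    · rintro c (hc | hc) d hd
      · exact Or.inl (hcl c hc hd)
      · right
        rw [pvComp_eq_of_mem hw hc] at hd
        exact hd
    · exact hzg
    · show (r.2.1.foldl _ st.2).length = mN
      rw [hulen, hlen]
    · intro col hcolm
      show (r.2.1.foldl _ st.2).getD col 0 = _
      rw [huget col (by omega), hcol col hcolm]
      unfold pvNcol
      have hsplit : (Z ∪ pvComp n m land w) ∩ {c | pvTouch n m land c (col : Int)} =
          (Z ∩ {c | pvTouch n m land c (col : Int)}) ∪
          (pvComp n m land w ∩ {c | pvTouch n m land c (col : Int)}) :=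
        Set.union_inter_distrib_right _ _ _
      have hfin1 : (Z ∩ {c | pvTouch n m land c (col : Int)}).Finite :=
        (pvOilSet_finite.subset hsub).inter_of_left _
      have hfin2 : (pvComp n m land w ∩ {c | pvTouch n m land c (col : Int)}).Finite :=
        pvComp_finite.inter_of_left _
      have hdisj2 : Disjoint (Z ∩ {c | pvTouch n m land c (col : Int)})
          (pvComp n m land w ∩ {c | pvTouch n m land c (col : Int)}) :=
        (hcompdisj.mono_left Set.inter_subset_left).mono_right Set.inter_subset_left
      rw [hsplit, Set.ncard_union_eq hdisj2 hfin1 hfin2]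
      by_cases ht : pvTouch n m land w (col : Int)
      · have hceq : pvComp n m land w ∩ {c | pvTouch n m land c (col : Int)} =
            pvComp n m land w := by
          ext d
          simp only [Set.mem_inter_iff, Set.mem_setOf_eq]
          refine ⟨fun h => h.1, fun hd => ⟨hd, ?_⟩⟩
          show pvTouch n m land d (col : Int)
          unfold pvTouch
          rw [pvComp_eq_of_mem hw hd]
          exact ht
        rw [hceq, if_pos ((hvchar _).mpr ht), hfc]
        push_cast
        ring
      · have hceq : pvComp n m land w ∩ {c | pvTouch n m land c (col : Int)} =
            (∅ : Set (Int × Int)) := by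
          ext d
          simp only [Set.mem_inter_iff, Set.mem_setOf_eq, Set.mem_empty_iff_false,
            iff_false]
          rintro ⟨hd, hT⟩
          have hT' : pvTouch n m land d (col : Int) := hT
          unfold pvTouch at hT'
          rw [pvComp_eq_of_mem hw hd] at hT'
          exact ht hT'
        rw [hceq, if_neg (fun hc => ht ((hvchar _).mp hc))]
        simp
  · push_neg at h0
    have hcell : pvCellA n m st i j = st := by
      simp only [pvCellA]
      rw [if_neg (by simpa using h0)]
    rw [hcell]
    refine ⟨Z, ⟨hsub, hcl, hz, hlen, hcol⟩, le_refl _, ?_⟩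
    · intro hoil
      by_contra hmem
      have := (hz.2.2 (i : Int) (j : Int) (by positivity) (by positivity)).2
        (by simpa using hmem)
      rw [h0] at this
      exact hoil.2.2.2.2 this.symm


-- ===== row-major cell list and the nested-fold bridge =====
def pvCells (n m : Nat) : List (Nat × Nat) :=
  (List.range n).flatMap (fun i => (List.range m).map (fun j => (i, j)))

lemma pvFoldl_nested {sigma : Type} (f : sigma → Nat → Nat → sigma) (n m : Nat) :
    ∀ init : sigma,
    (List.range n).foldl (fun st i => (List.range m).foldl (fun st j => f st i j) st) init
      = (pvCells n m).foldl (fun st p => f st p.1 p.2) init := by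
  induction n with
  | zero => intro init; simp [pvCells]
  | succ k ih =>
    intro init
    have hc : pvCells (k + 1) m = pvCells k m ++ (List.range m).map (fun j => (k, j)) := by
      simp [pvCells, List.range_succ]
    rw [List.range_succ, List.foldl_append, hc, List.foldl_append, ih, List.foldl_map]
    simp

lemma pvCells_mem {n m : Nat} {p : Nat × Nat} :
    p ∈ pvCells n m ↔ p.1 < n ∧ p.2 < m := by
  rcases p with ⟨a, b⟩
  simp only [pvCells, List.mem_flatMap, List.mem_map, List.mem_range]
  constructor
  · rintro ⟨i, hi, j, hj, he⟩
    rw [Prod.mk.injEq] at he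
    exact ⟨he.1 ▸ hi, he.2 ▸ hj⟩
  · rintro ⟨ha, hb⟩
    exact ⟨a, ha, ⟨b, hb, rfl⟩⟩

lemma pvCells_nodup (n m : Nat) : (pvCells n m).Nodup := by
  induction n with
  | zero => simp [pvCells]
  | succ k ih =>
    have hc : pvCells (k + 1) m = pvCells k m ++ (List.range m).map (fun j => (k, j)) := by
      simp [pvCells, List.range_succ]
    rw [hc, List.nodup_append]
    refine ⟨ih, ?_, ?_⟩
    · exact (List.nodup_range).map (fun a b h => congrArg Prod.snd h)
    · intro a ha b hb
      have h1 := pvCells_mem.mp ha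
      obtain ⟨j, hj, he⟩ := List.mem_map.mp hb
      intro hab
      rw [hab, ← he] at h1
      exact absurd h1.1 (by omega)

-- the scan over any prefix of cells preserves the invariant and swallows all its oil cells
lemma pvScanA {n m : Int} {land : List (List Int)} {mN : Nat} (hm : m = (mN : Int)) :
    ∀ (cells : List (Nat × Nat)) (Z : Set (Int × Int)) (st : List (List Int) × List Int),
      pvInvA n m land mN Z st → (∀ p ∈ cells, ((p.1 : Int) < n ∧ p.2 < mN)) →
      ∃ Z', pvInvA n m land mN Z'
          (cells.foldl (fun st p => pvCellA n m st p.1 p.2) st) ∧ Z ⊆ Z' ∧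
        ∀ p ∈ cells, ((p.1 : Int), (p.2 : Int)) ∈ pvOilSet n m land →
          ((p.1 : Int), (p.2 : Int)) ∈ Z' := by
  intro cells
  induction cells with
  | nil =>
    intro Z st hinv _
    exact ⟨Z, hinv, le_refl _, by simp⟩
  | cons p tl ih =>
    intro Z st hinv hb
    obtain ⟨hp1, hp2⟩ := hb p List.mem_cons_self
    obtain ⟨Z1, hinv1, hZ1, hpin⟩ := pvCellA_inv hm hinv p.1 p.2 hp1 hp2
    obtain ⟨Z2, hinv2, hZ2, hall⟩ := ih Z1 _ hinv1
      (fun q hq => hb q (List.mem_cons_of_mem _ hq))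
    refine ⟨Z2, by simpa using hinv2, hZ1.trans hZ2, ?_⟩
    intro q hq hoil
    rcases List.mem_cons.mp hq with rfl | hq'
    · exact hZ2 (hpin hoil)
    · exact hall q hq' hoil


-- ===== A computes, per column, the number of oil cells whose component touches it =====
lemma pvSolutionA_char (land : List (List Int)) (_hne : land ≠ [])
    (hm0 : 0 < (land.headD []).length) :
    solution land = (List.range (land.headD []).length).foldl
      (fun (b : Int) (c : Nat) => max b (pvNcol (land.length : Int) (((land.headD []).length : Nat) : Int) land
        (pvOilSet (land.length : Int) (((land.headD []).length : Nat) : Int) land) (c : Int))) 0 := by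
  set nN := land.length with hnN
  set mN := (land.headD []).length with hmN
  set n : Int := (nN : Int) with hn
  set m : Int := (mN : Int) with hmI
  simp only [solution]
  rw [pvFoldl_nested (fun st i j => pvCellA n m st i j) nN mN]
  set res := (pvCells nN mN).foldl (fun st p => pvCellA n m st p.1 p.2)
    (land, List.replicate mN 0) with hres
  have hinv0 : pvInvA n m land mN (∅ : Set (Int × Int)) (land, List.replicate mN 0) := by
    refine ⟨by simp, fun c hc => absurd hc (Set.notMem_empty c), pvZeroed_refl land, by simp, ?_⟩
    intro col hcol
    show (List.replicate mN (0 : Int)).getD col 0 = _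
    rw [List.getD_eq_getElem?_getD]
    simp only [List.getElem?_replicate, hcol, if_pos]
    unfold pvNcol
    simp
  obtain ⟨Z, hinv, -, hall⟩ := pvScanA rfl (pvCells nN mN) ∅ (land, List.replicate mN 0)
    hinv0 (by
      intro p hp
      have := pvCells_mem.mp hp
      exact ⟨by omega, this.2⟩)
  rw [← hres] at hinv
  have hZ : Z = pvOilSet n m land := by
    apply le_antisymm hinv.1
    intro c hc
    obtain ⟨a1, a2, a3, a4, a5⟩ := hc
    have h1 : c.1.toNat < nN := by omega
    have h2 : c.2.toNat < mN := by omega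
    have hcast : ((c.1.toNat : Int), (c.2.toNat : Int)) = c := by
      rw [Int.toNat_of_nonneg a1, Int.toNat_of_nonneg a3]
    have := hall (c.1.toNat, c.2.toNat) (pvCells_mem.mpr ⟨h1, h2⟩)
      (by rw [hcast]; exact ⟨a1, a2, a3, a4, a5⟩)
    rwa [hcast] at this
  obtain ⟨-, -, -, hlen, hcol⟩ := hinv
  rw [hZ] at hcol
  have harr : res.2 = (List.range mN).map (fun c : Nat => pvNcol n m land (pvOilSet n m land) (c : Int)) := by
    apply List.ext_getElem (by simp [hlen])
    intro k hk1 hk2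
    have hk : k < mN := by rwa [hlen] at hk1
    have hval := hcol k hk
    rw [List.getD_eq_getElem _ _ hk1] at hval
    rw [hval]
    simp only [List.getElem_map, List.getElem_range]
    rw [hmI]
  have hnn : ∀ x ∈ res.2, 0 ≤ x := by
    intro x hx
    rw [harr] at hx
    obtain ⟨k, -, he⟩ := List.mem_map.mp hx
    rw [← he]
    unfold pvNcol
    positivity
  have hneA : res.2 ≠ [] := by
    intro hcon
    rw [hcon] at hlen
    simp at hlen
    omega
  rw [pvMaxMatch res.2 hneA hnn, harr, List.foldl_map]


-- ===== B: labels, invariant P, fixpoint property F =====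
lemma pvGetV_self {g : List (List Int)} {x y : Int} (v : Int)
    (hx : x.toNat < g.length) (hy : y.toNat < (g.getD x.toNat []).length) :
    pvGetC (pvSetV g x y v) x y = v := by
  unfold pvGetC pvSetV
  rw [List.getD_eq_getElem?_getD (l := g.modify _ _), List.getElem?_modify,
    List.getElem?_eq_getElem hx]
  have hrow : g[x.toNat] = g.getD x.toNat [] := (List.getD_eq_getElem g [] hx).symm
  have hy' : y.toNat < (g[x.toNat]?.getD []).length := by
    rw [List.getElem?_eq_getElem hx]; simpa [hrow] using hy
  simp [hrow, hy']

lemma pvGetV_ne {g : List (List Int)} {x y a b : Int} (v : Int)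
    (h : a.toNat ≠ x.toNat ∨ b.toNat ≠ y.toNat) :
    pvGetC (pvSetV g x y v) a b = pvGetC g a b := by
  unfold pvGetC pvSetV
  rw [List.getD_eq_getElem?_getD (l := g.modify _ _), List.getD_eq_getElem?_getD (l := g),
    List.getElem?_modify]
  rcases h with h | h
  · simp [Ne.symm h]
  · rcases eq_or_ne x.toNat a.toNat with hxa | hxa
    · simp only [hxa, if_true, Option.map_eq_map]
      rcases hg : g[a.toNat]? with _ | row
      · simp
      · simp only [Option.map_some, Option.getD_some]
        rw [List.getD_eq_getElem?_getD, List.getD_eq_getElem?_getD, List.getElem?_set]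
        simp [Ne.symm h]
    · simp [hxa]

lemma pvSetV_length {g : List (List Int)} {x y v : Int} :
    (pvSetV g x y v).length = g.length := by
  simp [pvSetV]

lemma pvSetV_rows {g : List (List Int)} {x y v : Int} {mN : Nat}
    (h : ∀ row ∈ g, row.length = mN) : ∀ row ∈ pvSetV g x y v, row.length = mN := by
  intro row hrow
  unfold pvSetV at hrow
  rcases List.mem_iff_getElem.mp hrow with ⟨k, hk, he⟩
  rw [List.getElem_modify] at he
  by_cases hkx : x.toNat = k
  · rw [if_pos hkx] at he
    rw [← he, List.length_set]
    exact h _ (List.getElem_mem _)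
  · rw [if_neg hkx] at he
    exact h _ (he ▸ List.getElem_mem _)

lemma pvRowMeasure_set : ∀ (row : List Int) (j : Nat), j < row.length → ∀ v : Int,
    ((row.set j v).map (fun x => (x + 1).toNat)).sum + (row.getD j 0 + 1).toNat
      = (row.map (fun x => (x + 1).toNat)).sum + (v + 1).toNat := by
  intro row
  induction row with
  | nil => intro j hj; simp at hj
  | cons a t ih =>
    intro j hj v
    cases j with
    | zero => simp [List.set]; omega
    | succ k =>
      have hk : k < t.length := by simpa using hj
      have := ih k hk v
      simp only [List.set, List.map_cons, List.sum_cons, List.getD_cons_succ]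
      omega

lemma pvMeasure_set : ∀ (g : List (List Int)) (i j : Nat),
    i < g.length → j < (g.getD i []).length → ∀ v : Int,
    pvLabMeasure (pvSetV g (i : Int) (j : Int) v) + (pvGetC g (i : Int) (j : Int) + 1).toNat
      = pvLabMeasure g + (v + 1).toNat := by
  intro g
  induction g with
  | nil => intro i j hi; simp at hi
  | cons r t ih =>
    intro i j hi hj v
    cases i with
    | zero =>
      have hj' : j < r.length := by simpa using hj
      show pvLabMeasure ((r :: t).modify ((0 : Int)).toNat (fun row => row.set ((j : Int)).toNat v)) + _ = _
      simp only [Int.toNat_natCast, Int.toNat_zero, List.modify_cons]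
      simp only [if_true]
      unfold pvLabMeasure pvGetC
      simp only [Int.toNat_natCast, List.map_cons, List.sum_cons,
        List.getD_cons_zero]
      have := pvRowMeasure_set r j hj' v
      omega
    | succ k =>
      have hik : k < t.length := by simpa using hi
      have hjk : j < (t.getD k []).length := by simpa using hj
      have hrec := ih k j hik hjk v
      show pvLabMeasure ((r :: t).modify (((k : Nat) + 1 : Int)).toNat
        (fun row => row.set ((j : Int)).toNat v)) + _ = _
      have hidx : (((k : Nat) + 1 : Int)).toNat = k + 1 := by omega
      rw [hidx]
      simp only [List.modify_cons]
      rw [if_neg (Nat.succ_ne_zero k)]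
      unfold pvLabMeasure pvGetC at hrec ⊢
      simp only [List.map_cons, List.sum_cons, Int.toNat_natCast] at hrec ⊢
      have hgd : ((r :: t).getD (k + 1) []) = t.getD k [] := by simp
      rw [hgd]
      unfold pvSetV at hrec
      simp only [Int.toNat_natCast, Nat.add_sub_cancel] at hrec ⊢
      omega

def pvPB (n m : Int) (land : List (List Int)) (nN mN : Nat) (lab : List (List Int)) : Prop :=
  lab.length = nN ∧ (∀ row ∈ lab, row.length = mN) ∧
  ∀ i j : Nat, i < nN → j < mN →
    (((i : Int), (j : Int)) ∈ pvOilSet n m land →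
      (∃ d ∈ pvComp n m land ((i : Int), (j : Int)),
        pvGetC lab (i : Int) (j : Int) = d.1 * m + d.2) ∧
      pvGetC lab (i : Int) (j : Int) ≤ (i : Int) * m + (j : Int)) ∧
    (((i : Int), (j : Int)) ∉ pvOilSet n m land → pvGetC lab (i : Int) (j : Int) = -1)

def pvFB (n m : Int) (nN mN : Nat) (lab : List (List Int)) : Prop :=
  ∀ i j : Nat, i < nN → j < mN → pvGetC lab (i : Int) (j : Int) ≠ -1 →
    ∀ p ∈ pvNbrs (i : Int) (j : Int),
      0 ≤ p.1 → p.1 < n → 0 ≤ p.2 → p.2 < m → pvGetC lab p.1 p.2 ≠ -1 →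
      pvGetC lab (i : Int) (j : Int) ≤ pvGetC lab p.1 p.2


-- facts extracted from the invariant P
lemma pvPB_row_len {n m : Int} {land : List (List Int)} {nN mN : Nat} {lab : List (List Int)}
    (hP : pvPB n m land nN mN lab) {i : Nat} (hi : i < nN) :
    (lab.getD i []).length = mN := by
  have hi' : i < lab.length := by rw [hP.1]; exact hi
  rw [List.getD_eq_getElem _ _ hi']
  exact hP.2.1 _ (List.getElem_mem _)

lemma pvPB_oil_val {n m : Int} {land : List (List Int)} {nN mN : Nat} {lab : List (List Int)}
    (hm : m = (mN : Int)) (hP : pvPB n m land nN mN lab) {i j : Nat}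
    (hi : i < nN) (hj : j < mN) (hoil : ((i : Int), (j : Int)) ∈ pvOilSet n m land) :
    0 ≤ pvGetC lab (i : Int) (j : Int) := by
  obtain ⟨⟨d, hd, hval⟩, -⟩ := (hP.2.2 i j hi hj).1 hoil
  obtain ⟨d1, -, d3, -, -⟩ := pvComp_oil hoil hd
  rw [hval]
  have hm0 : 0 ≤ m := by omega
  positivity

lemma pvPB_ne_neg_iff {n m : Int} {land : List (List Int)} {nN mN : Nat} {lab : List (List Int)}
    (hm : m = (mN : Int)) (hP : pvPB n m land nN mN lab) {i j : Nat}
    (hi : i < nN) (hj : j < mN) :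
    pvGetC lab (i : Int) (j : Int) ≠ -1 ↔ ((i : Int), (j : Int)) ∈ pvOilSet n m land := by
  constructor
  · intro h
    by_contra hno
    exact h ((hP.2.2 i j hi hj).2 hno)
  · intro hoil
    have := pvPB_oil_val hm hP hi hj hoil
    omega

-- characterisation of the running-minimum fold inside pvLabRelax
lemma pvRelaxFold_le {n m : Int} (lab : List (List Int)) :
    ∀ (l : List (Int × Int)) (r0 : Int),
      l.foldl (fun r p =>
        if 0 ≤ p.1 ∧ p.1 < n ∧ 0 ≤ p.2 ∧ p.2 < m ∧
            pvGetC lab p.1 p.2 ≠ -1 ∧ pvGetC lab p.1 p.2 < r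
        then pvGetC lab p.1 p.2 else r) r0 ≤ r0 := by
  intro l
  induction l with
  | nil => intro r0; simp
  | cons q tl ih =>
    intro r0
    simp only [List.foldl_cons]
    split_ifs with hq
    · exact le_trans (ih _) (le_of_lt hq.2.2.2.2.2)
    · exact ih r0

lemma pvRelaxFold_cases {n m : Int} (lab : List (List Int)) :
    ∀ (l : List (Int × Int)) (r0 : Int),
      (l.foldl (fun r p =>
        if 0 ≤ p.1 ∧ p.1 < n ∧ 0 ≤ p.2 ∧ p.2 < m ∧
            pvGetC lab p.1 p.2 ≠ -1 ∧ pvGetC lab p.1 p.2 < r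
        then pvGetC lab p.1 p.2 else r) r0 = r0) ∨
      ∃ p ∈ l, (0 ≤ p.1 ∧ p.1 < n ∧ 0 ≤ p.2 ∧ p.2 < m ∧ pvGetC lab p.1 p.2 ≠ -1) ∧
        (l.foldl (fun r p =>
          if 0 ≤ p.1 ∧ p.1 < n ∧ 0 ≤ p.2 ∧ p.2 < m ∧
              pvGetC lab p.1 p.2 ≠ -1 ∧ pvGetC lab p.1 p.2 < r
          then pvGetC lab p.1 p.2 else r) r0 = pvGetC lab p.1 p.2) := by
  intro l
  induction l with
  | nil => intro r0; left; rfl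
  | cons q tl ih =>
    intro r0
    simp only [List.foldl_cons]
    split_ifs with hq
    · rcases ih (pvGetC lab q.1 q.2) with h | ⟨p, hp, hv, he⟩
      · exact Or.inr ⟨q, List.mem_cons_self, ⟨hq.1, hq.2.1, hq.2.2.1, hq.2.2.2.1,
          hq.2.2.2.2.1⟩, h⟩
      · exact Or.inr ⟨p, List.mem_cons_of_mem _ hp, hv, he⟩
    · rcases ih r0 with h | ⟨p, hp, hv, he⟩
      · exact Or.inl h
      · exact Or.inr ⟨p, List.mem_cons_of_mem _ hp, hv, he⟩

lemma pvRelaxFold_le_mem {n m : Int} (lab : List (List Int)) :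
    ∀ (l : List (Int × Int)) (r0 : Int) (p : Int × Int), p ∈ l →
      (0 ≤ p.1 ∧ p.1 < n ∧ 0 ≤ p.2 ∧ p.2 < m ∧ pvGetC lab p.1 p.2 ≠ -1) →
      l.foldl (fun r p =>
        if 0 ≤ p.1 ∧ p.1 < n ∧ 0 ≤ p.2 ∧ p.2 < m ∧
            pvGetC lab p.1 p.2 ≠ -1 ∧ pvGetC lab p.1 p.2 < r
        then pvGetC lab p.1 p.2 else r) r0 ≤ pvGetC lab p.1 p.2 := by
  intro l
  induction l with
  | nil => intro r0 p hp; simp at hp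
  | cons q tl ih =>
    intro r0 p hp hv
    rcases List.mem_cons.mp hp with rfl | hp'
    · simp only [List.foldl_cons]
      split_ifs with hq
      · exact pvRelaxFold_le lab tl _
      · have : ¬ pvGetC lab p.1 p.2 < r0 := by
          intro hlt
          exact hq ⟨hv.1, hv.2.1, hv.2.2.1, hv.2.2.2.1, hv.2.2.2.2, hlt⟩
        exact le_trans (pvRelaxFold_le lab tl r0) (by omega)
    · simp only [List.foldl_cons]
      split_ifs with hq
      · exact ih _ p hp' hv
      · exact ih r0 p hp' hv

-- one relaxation step preserves P, never increases the measure, and strictly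
-- decreases it when it reports a change
lemma pvLabRelax_inv {n m : Int} {land : List (List Int)} {nN mN : Nat}
    (hn : n = (nN : Int)) (hm : m = (mN : Int)) {lab : List (List Int)}
    (hP : pvPB n m land nN mN lab) (i j : Nat) (hi : i < nN) (hj : j < mN) :
    pvPB n m land nN mN (pvLabRelax n m lab i j).1 ∧
    pvLabMeasure (pvLabRelax n m lab i j).1 ≤ pvLabMeasure lab ∧
    ((pvLabRelax n m lab i j).2 = true → pvLabMeasure (pvLabRelax n m lab i j).1 < pvLabMeasure lab) ∧
    ((pvLabRelax n m lab i j).2 = false → (pvLabRelax n m lab i j).1 = lab) := by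
  by_cases h0 : pvGetC lab (i : Int) (j : Int) ≠ -1
  · set r0 := pvGetC lab (i : Int) (j : Int) with hr0
    set r := (pvNbrs (i : Int) (j : Int)).foldl (fun r p =>
      if 0 ≤ p.1 ∧ p.1 < n ∧ 0 ≤ p.2 ∧ p.2 < m ∧
          pvGetC lab p.1 p.2 ≠ -1 ∧ pvGetC lab p.1 p.2 < r
      then pvGetC lab p.1 p.2 else r) r0 with hrdef
    by_cases hlt : r < r0
    · have hres : pvLabRelax n m lab i j = (pvSetV lab (i : Int) (j : Int) r, true) := by
        simp only [pvLabRelax]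
        rw [if_pos h0, if_pos hlt]
      rw [hres]
      dsimp only
      have hoil : ((i : Int), (j : Int)) ∈ pvOilSet n m land :=
        (pvPB_ne_neg_iff hm hP hi hj).1 h0
      -- the written value is the label of some cell of the same component
      have hrval : ∃ d ∈ pvComp n m land ((i : Int), (j : Int)), r = d.1 * m + d.2 := by
        rcases pvRelaxFold_cases lab (pvNbrs (i : Int) (j : Int)) r0 with h | ⟨p, hp, hv, he⟩
        · rw [← hrdef] at h; omega
        · rw [← hrdef] at he
          have hpn1 : p.1.toNat < nN := by omega
          have hpn2 : p.2.toNat < mN := by omega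
          have hcast : ((p.1.toNat : Int), (p.2.toNat : Int)) = p := by
            rw [Int.toNat_of_nonneg hv.1, Int.toNat_of_nonneg hv.2.2.1]
          have hc1 : ((p.1.toNat : Nat) : Int) = p.1 := Int.toNat_of_nonneg hv.1
          have hc2 : ((p.2.toNat : Nat) : Int) = p.2 := Int.toNat_of_nonneg hv.2.2.1
          have hpoil : p ∈ pvOilSet n m land := by
            have := (pvPB_ne_neg_iff hm hP hpn1 hpn2).1 (by rw [hc1, hc2]; exact hv.2.2.2.2)
            rwa [hcast] at this
          have hpcomp : p ∈ pvComp n m land ((i : Int), (j : Int)) :=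
            pvMem_comp.mpr (Or.inr (Relation.TransGen.single
              ⟨(pvNbrs_mem _ _ _).mp hp, hpoil⟩))
          have hPp := ((hP.2.2 p.1.toNat p.2.toNat hpn1 hpn2).1 (by rw [hcast]; exact hpoil)).1
          obtain ⟨d, hd, hval⟩ := hPp
          rw [hcast] at hd
          rw [hc1, hc2] at hval
          refine ⟨d, ?_, by rw [he, hval]⟩
          rw [← pvComp_eq_of_mem hoil hpcomp]
          exact hd
      have hrge : 0 ≤ r := by
        obtain ⟨d, hd, hval⟩ := hrval
        obtain ⟨d1, -, d3, -, -⟩ := pvComp_oil hoil hd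
        have hm0 : 0 ≤ m := by omega
        rw [hval]; positivity
      have hr0ge : 0 ≤ r0 := pvPB_oil_val hm hP hi hj hoil
      have hil : i < lab.length := by rw [hP.1]; exact hi
      have hjl : j < (lab.getD i []).length := by rw [pvPB_row_len hP hi]; exact hj
      have hmeas := pvMeasure_set lab i j hil hjl r
      refine ⟨?_, by omega, fun _ => by omega, by simp⟩
      refine ⟨by rw [pvSetV_length, hP.1], pvSetV_rows hP.2.1, ?_⟩
      intro a b ha hb
      by_cases hab : a = i ∧ b = j
      · obtain ⟨rfl, rfl⟩ := hab
        have hget : pvGetC (pvSetV lab (a : Int) (b : Int) r) (a : Int) (b : Int) = r :=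
          pvGetV_self r (by simpa using hil) (by simpa using hjl)
        constructor
        · intro _
          refine ⟨?_, ?_⟩
          · obtain ⟨d, hd, hval⟩ := hrval
            exact ⟨d, hd, by rw [hget, hval]⟩
          · rw [hget]
            have := ((hP.2.2 a b ha hb).1 hoil).2
            omega
        · intro hno
          exact absurd hoil hno
      · have hne : (a : Int).toNat ≠ ((i : Nat) : Int).toNat ∨
            (b : Int).toNat ≠ ((j : Nat) : Int).toNat := by
          rcases Decidable.not_and_iff_or_not.mp hab with h | h
          · left; simpa using fun hc => h hc
          · right; simpa using fun hc => h hc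
        have hget : pvGetC (pvSetV lab (i : Int) (j : Int) r) (a : Int) (b : Int) =
            pvGetC lab (a : Int) (b : Int) := pvGetV_ne r hne
        rw [hget]
        exact hP.2.2 a b ha hb
    · have hres : pvLabRelax n m lab i j = (lab, false) := by
        simp only [pvLabRelax]
        rw [if_pos h0, if_neg hlt]
      rw [hres]
      exact ⟨hP, le_refl _, by simp, fun _ => rfl⟩
  · have hres : pvLabRelax n m lab i j = (lab, false) := by
      simp only [pvLabRelax]
      rw [if_neg h0]
    rw [hres]
    exact ⟨hP, le_refl _, by simp, fun _ => rfl⟩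


-- the or-accumulated changed flag never resets
lemma pvPassFlag_mono {n m : Int} :
    ∀ (cells : List (Nat × Nat)) (st : List (List Int) × Bool), st.2 = true →
      (cells.foldl (fun st p =>
        let t := pvLabRelax n m st.1 p.1 p.2
        (t.1, st.2 || t.2)) st).2 = true := by
  intro cells
  induction cells with
  | nil => intro st h; exact h
  | cons p tl ih =>
    intro st h
    simp only [List.foldl_cons]
    exact ih _ (by rw [h]; simp)

lemma pvPassFold {n m : Int} {land : List (List Int)} {nN mN : Nat}
    (hn : n = (nN : Int)) (hm : m = (mN : Int)) :
    ∀ (cells : List (Nat × Nat)), (∀ p ∈ cells, p.1 < nN ∧ p.2 < mN) →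
    ∀ (st : List (List Int) × Bool), pvPB n m land nN mN st.1 →
      pvPB n m land nN mN ((cells.foldl (fun st p =>
        let t := pvLabRelax n m st.1 p.1 p.2
        (t.1, st.2 || t.2)) st)).1 ∧
      pvLabMeasure ((cells.foldl (fun st p =>
        let t := pvLabRelax n m st.1 p.1 p.2
        (t.1, st.2 || t.2)) st)).1 ≤ pvLabMeasure st.1 ∧
      (((cells.foldl (fun st p =>
        let t := pvLabRelax n m st.1 p.1 p.2
        (t.1, st.2 || t.2)) st)).2 = st.2 ∨
        pvLabMeasure ((cells.foldl (fun st p =>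
          let t := pvLabRelax n m st.1 p.1 p.2
          (t.1, st.2 || t.2)) st)).1 < pvLabMeasure st.1) ∧
      (((cells.foldl (fun st p =>
        let t := pvLabRelax n m st.1 p.1 p.2
        (t.1, st.2 || t.2)) st)).2 = false →
        ((cells.foldl (fun st p =>
          let t := pvLabRelax n m st.1 p.1 p.2
          (t.1, st.2 || t.2)) st)).1 = st.1 ∧
        ∀ p ∈ cells, (pvLabRelax n m st.1 p.1 p.2).2 = false) := by
  intro cells
  induction cells with
  | nil =>
    intro _ st hP
    exact ⟨hP, le_refl _, Or.inl rfl, fun _ => ⟨rfl, by simp⟩⟩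
  | cons p tl ih =>
    intro hb st hP
    obtain ⟨hp1, hp2⟩ := hb p List.mem_cons_self
    obtain ⟨hP1, hle1, hstrict1, hfix1⟩ := pvLabRelax_inv hn hm hP p.1 p.2 hp1 hp2
    simp only [List.foldl_cons]
    by_cases ht : (pvLabRelax n m st.1 p.1 p.2).2
    · obtain ⟨ihP, ihle, ihdec, ihfix⟩ := ih (fun q hq => hb q (List.mem_cons_of_mem _ hq))
        ((pvLabRelax n m st.1 p.1 p.2).1, st.2 || (pvLabRelax n m st.1 p.1 p.2).2) hP1
      have hflag : (tl.foldl (fun st p =>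
          let t := pvLabRelax n m st.1 p.1 p.2
          (t.1, st.2 || t.2))
          ((pvLabRelax n m st.1 p.1 p.2).1, st.2 || (pvLabRelax n m st.1 p.1 p.2).2)).2
          = true :=
        pvPassFlag_mono _ _ (by rw [ht]; simp)
      refine ⟨ihP, le_trans ihle (hle1), Or.inr (lt_of_le_of_lt ihle (hstrict1 ht)), ?_⟩
      intro hcon
      rw [hflag] at hcon
      exact absurd hcon (by simp)
    · have hfalse : (pvLabRelax n m st.1 p.1 p.2).2 = false := by
        revert ht; cases (pvLabRelax n m st.1 p.1 p.2).2 <;> simp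
      have heq : (pvLabRelax n m st.1 p.1 p.2).1 = st.1 := hfix1 hfalse
      have hst' : ((pvLabRelax n m st.1 p.1 p.2).1, st.2 || (pvLabRelax n m st.1 p.1 p.2).2)
          = (st.1, st.2) := by
        rw [heq, hfalse]; simp
      rw [hst']
      obtain ⟨ihP, ihle, ihdec, ihfix⟩ := ih (fun q hq => hb q (List.mem_cons_of_mem _ hq))
        (st.1, st.2) hP
      refine ⟨ihP, ihle, ihdec, ?_⟩
      intro hcon
      obtain ⟨h1, h2⟩ := ihfix hcon
      refine ⟨h1, ?_⟩
      intro q hq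
      rcases List.mem_cons.mp hq with rfl | hq'
      · exact hfalse
      · exact h2 q hq'

-- a pass that reports no change leaves the labels unchanged and at a fixpoint
lemma pvLabPass_spec {n m : Int} {land : List (List Int)} {nN mN : Nat}
    (hn : n = (nN : Int)) (hm : m = (mN : Int)) (lab : List (List Int))
    (hP : pvPB n m land nN mN lab) :
    pvPB n m land nN mN (pvLabPass n m nN mN lab).1 ∧
    ((pvLabPass n m nN mN lab).2 = true →
      pvLabMeasure (pvLabPass n m nN mN lab).1 < pvLabMeasure lab) ∧
    ((pvLabPass n m nN mN lab).2 = false →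
      (pvLabPass n m nN mN lab).1 = lab ∧ pvFB n m nN mN lab) := by
  have hbr : pvLabPass n m nN mN lab = (pvCells nN mN).foldl (fun st p =>
      let t := pvLabRelax n m st.1 p.1 p.2
      (t.1, st.2 || t.2)) (lab, false) := by
    unfold pvLabPass
    exact pvFoldl_nested (fun st i j =>
      let t := pvLabRelax n m st.1 i j
      (t.1, st.2 || t.2)) nN mN (lab, false)
  obtain ⟨hP', hle, hdec, hfix⟩ := pvPassFold hn hm (pvCells nN mN)
    (fun p hp => pvCells_mem.mp hp) (lab, false) hP
  rw [← hbr] at hP' hle hdec hfix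
  refine ⟨hP', ?_, ?_⟩
  · intro ht
    rcases hdec with h | h
    · rw [ht] at h; exact absurd h.symm (by simp)
    · exact h
  · intro hf
    obtain ⟨h1, h2⟩ := hfix hf
    refine ⟨h1, ?_⟩
    intro i j hi hj hne p hp hb1 hb2 hb3 hb4 hne2
    have hrel := h2 (i, j) (pvCells_mem.mpr ⟨hi, hj⟩)
    -- a no-change relax at an oil cell means its label is ≤ all valid neighbours
    have hr0 : pvGetC lab (i : Int) (j : Int) ≠ -1 := hne
    have hnotlt : ¬ ((pvNbrs (i : Int) (j : Int)).foldl (fun r p =>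
        if 0 ≤ p.1 ∧ p.1 < n ∧ 0 ≤ p.2 ∧ p.2 < m ∧
            pvGetC lab p.1 p.2 ≠ -1 ∧ pvGetC lab p.1 p.2 < r
        then pvGetC lab p.1 p.2 else r) (pvGetC lab (i : Int) (j : Int))
        < pvGetC lab (i : Int) (j : Int)) := by
      intro hlt
      have : (pvLabRelax n m lab i j).2 = true := by
        simp only [pvLabRelax]
        rw [if_pos hr0, if_pos hlt]
      rw [this] at hrel
      exact absurd hrel (by simp)
    have hlemem := pvRelaxFold_le_mem lab (pvNbrs (i : Int) (j : Int))
      (pvGetC lab (i : Int) (j : Int)) p hp ⟨hb1, hb2, hb3, hb4, hne2⟩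
    omega

-- enough fuel reaches a fixpoint of the relaxation
lemma pvLabLoop_fix {n m : Int} {land : List (List Int)} {nN mN : Nat}
    (hn : n = (nN : Int)) (hm : m = (mN : Int)) :
    ∀ (fuel : Nat) (lab : List (List Int)), pvPB n m land nN mN lab →
      pvLabMeasure lab < fuel →
      pvPB n m land nN mN (pvLabLoop n m nN mN fuel lab) ∧
      pvFB n m nN mN (pvLabLoop n m nN mN fuel lab) := by
  intro fuel
  induction fuel with
  | zero => intro lab _ h; simp at h
  | succ f ih =>
    intro lab hP hfuel
    obtain ⟨hP', hdec, hfix⟩ := pvLabPass_spec hn hm lab hP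
    have hunf : pvLabLoop n m nN mN (f + 1) lab =
        if (pvLabPass n m nN mN lab).2
        then pvLabLoop n m nN mN f (pvLabPass n m nN mN lab).1
        else (pvLabPass n m nN mN lab).1 := rfl
    rw [hunf]
    by_cases ht : (pvLabPass n m nN mN lab).2
    · rw [if_pos ht]
      exact ih (pvLabPass n m nN mN lab).1 hP' (by have := hdec ht; omega)
    · rw [if_neg ht]
      have hf : (pvLabPass n m nN mN lab).2 = false := by
        revert ht; cases (pvLabPass n m nN mN lab).2 <;> simp
      obtain ⟨h1, h2⟩ := hfix hf
      rw [h1]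
      exact ⟨hP, h2⟩


-- ===== consequences of the fixpoint: labels are constant on components and separate them =====
lemma pvPB_prov_int {n m : Int} {land : List (List Int)} {nN mN : Nat}
    (hn : n = (nN : Int)) (hm : m = (mN : Int)) {lab : List (List Int)}
    (hP : pvPB n m land nN mN lab) {c : Int × Int} (hc : c ∈ pvOilSet n m land) :
    ∃ e ∈ pvComp n m land c, pvGetC lab c.1 c.2 = e.1 * m + e.2 := by
  obtain ⟨a1, a2, a3, a4, a5⟩ := hc
  have h1 : c.1.toNat < nN := by omega
  have h2 : c.2.toNat < mN := by omega
  have hc1 : ((c.1.toNat : Nat) : Int) = c.1 := Int.toNat_of_nonneg a1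
  have hc2 : ((c.2.toNat : Nat) : Int) = c.2 := Int.toNat_of_nonneg a3
  have := ((hP.2.2 c.1.toNat c.2.toNat h1 h2).1 (by rw [hc1, hc2]; exact ⟨a1, a2, a3, a4, a5⟩)).1
  rw [hc1, hc2] at this
  obtain ⟨e, he, hval⟩ := this
  exact ⟨e, (by rw [show ((c.1, c.2) : Int × Int) = c from rfl] at he; exact he), hval⟩

lemma pvLab_ne_neg_int {n m : Int} {land : List (List Int)} {nN mN : Nat}
    (hn : n = (nN : Int)) (hm : m = (mN : Int)) {lab : List (List Int)}
    (hP : pvPB n m land nN mN lab) {c : Int × Int} (hc : c ∈ pvOilSet n m land) :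
    pvGetC lab c.1 c.2 ≠ -1 := by
  obtain ⟨e, he, hval⟩ := pvPB_prov_int hn hm hP hc
  obtain ⟨d1, -, d3, -, -⟩ := pvComp_oil hc he
  have hm0 : 0 ≤ m := by omega
  rw [hval]
  have : 0 ≤ e.1 * m + e.2 := by positivity
  omega

lemma pvLab_le_edge {n m : Int} {land : List (List Int)} {nN mN : Nat}
    (hn : n = (nN : Int)) (hm : m = (mN : Int)) {lab : List (List Int)}
    (hP : pvPB n m land nN mN lab) (hF : pvFB n m nN mN lab) {p q : Int × Int}
    (hp : p ∈ pvOilSet n m land) (hq : q ∈ pvOilSet n m land) (hadj : pvAdj p q) :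
    pvGetC lab p.1 p.2 ≤ pvGetC lab q.1 q.2 := by
  obtain ⟨a1, a2, a3, a4, a5⟩ := hp
  have h1 : p.1.toNat < nN := by omega
  have h2 : p.2.toNat < mN := by omega
  have hc1 : ((p.1.toNat : Nat) : Int) = p.1 := Int.toNat_of_nonneg a1
  have hc2 : ((p.2.toNat : Nat) : Int) = p.2 := Int.toNat_of_nonneg a3
  have hlabp : pvGetC lab ((p.1.toNat : Nat) : Int) ((p.2.toNat : Nat) : Int) ≠ -1 := by
    rw [hc1, hc2]
    exact pvLab_ne_neg_int hn hm hP ⟨a1, a2, a3, a4, a5⟩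
  have hqmem : q ∈ pvNbrs ((p.1.toNat : Nat) : Int) ((p.2.toNat : Nat) : Int) := by
    rw [hc1, hc2]
    exact (pvNbrs_mem p.1 p.2 q).mpr hadj
  obtain ⟨b1, b2, b3, b4, b5⟩ := hq
  have := hF p.1.toNat p.2.toNat h1 h2 hlabp q hqmem b1 b2 b3 b4
    (pvLab_ne_neg_int hn hm hP ⟨b1, b2, b3, b4, b5⟩)
  rw [hc1, hc2] at this
  exact this

lemma pvLab_const {n m : Int} {land : List (List Int)} {nN mN : Nat}
    (hn : n = (nN : Int)) (hm : m = (mN : Int)) {lab : List (List Int)}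
    (hP : pvPB n m land nN mN lab) (hF : pvFB n m nN mN lab) {c : Int × Int}
    (hc : c ∈ pvOilSet n m land) :
    ∀ d ∈ pvComp n m land c, pvGetC lab d.1 d.2 = pvGetC lab c.1 c.2 := by
  intro d hd
  rcases pvMem_comp.mp hd with rfl | h
  · rfl
  · induction h with
    | @single b hb =>
      have hb2 : b ∈ pvOilSet n m land := hb.2
      exact le_antisymm (pvLab_le_edge hn hm hP hF hb2 hc (pvAdj_symm hb.1))
        (pvLab_le_edge hn hm hP hF hc hb2 hb.1)
    | @tail b c' hpath hstep ih =>
      have hboil : b ∈ pvOilSet n m land := pvTransGen_ok hpath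
      have hc'oil : c' ∈ pvOilSet n m land := hstep.2
      have h1 : pvGetC lab b.1 b.2 = pvGetC lab c.1 c.2 :=
        ih (pvMem_comp.mpr (Or.inr hpath))
      have h2 := le_antisymm (pvLab_le_edge hn hm hP hF hc'oil hboil (pvAdj_symm hstep.1))
        (pvLab_le_edge hn hm hP hF hboil hc'oil hstep.1)
      rw [h2, h1]

lemma pvIdf_inj {m : Int} {d e : Int × Int} (hd2 : 0 ≤ d.2) (hd2' : d.2 < m)
    (he2 : 0 ≤ e.2) (he2' : e.2 < m) (h : d.1 * m + d.2 = e.1 * m + e.2) : d = e := by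
  have h1 : d.1 = e.1 := by
    by_contra hne
    rcases lt_or_gt_of_ne hne with hlt | hgt
    · have : (d.1 + 1) * m ≤ e.1 * m := by
        apply mul_le_mul_of_nonneg_right _ (by omega)
        omega
      nlinarith
    · have : (e.1 + 1) * m ≤ d.1 * m := by
        apply mul_le_mul_of_nonneg_right _ (by omega)
        omega
      nlinarith
  have h2 : d.2 = e.2 := by
    rw [h1] at h
    omega
  exact Prod.ext h1 h2

lemma pvLab_eq_iff {n m : Int} {land : List (List Int)} {nN mN : Nat}
    (hn : n = (nN : Int)) (hm : m = (mN : Int)) {lab : List (List Int)}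
    (hP : pvPB n m land nN mN lab) (hF : pvFB n m nN mN lab) {c d : Int × Int}
    (hc : c ∈ pvOilSet n m land) (hd : d ∈ pvOilSet n m land) :
    pvGetC lab c.1 c.2 = pvGetC lab d.1 d.2 ↔ pvComp n m land c = pvComp n m land d := by
  constructor
  · intro h
    obtain ⟨e, he, hve⟩ := pvPB_prov_int hn hm hP hc
    obtain ⟨e', he', hve'⟩ := pvPB_prov_int hn hm hP hd
    have hee : e = e' := by
      obtain ⟨-, -, x3, x4, -⟩ := pvComp_oil hc he
      obtain ⟨-, -, y3, y4, -⟩ := pvComp_oil hd he'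
      exact pvIdf_inj x3 x4 y3 y4 (by rw [← hve, ← hve', h])
    rw [← pvComp_eq_of_mem hc he, hee, pvComp_eq_of_mem hd he']
  · intro h
    have hdc : d ∈ pvComp n m land c := by
      rw [h]; exact pvComp_self d
    exact (pvLab_const hn hm hP hF hc d hdc).symm

-- the initial labels satisfy P
lemma pvLabInit_P {n m : Int} (land : List (List Int)) {nN mN : Nat}
    (hn : n = (nN : Int)) (hm : m = (mN : Int)) :
    pvPB n m land nN mN (pvLabInit land nN mN) := by
  have hget : ∀ i j : Nat, i < nN → j < mN →
      pvGetC (pvLabInit land nN mN) (i : Int) (j : Int) =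
        if pvGetC land (i : Int) (j : Int) ≠ 0 then ((i : Int) * (mN : Int) + (j : Int))
        else -1 := by
    intro i j hi hj
    have hrow : (pvLabInit land nN mN).getD i [] = (List.range mN).map (fun (j : Nat) =>
        if pvGetC land (i : Int) (j : Int) ≠ 0 then ((i : Int) * (mN : Int) + (j : Int))
        else -1) := by
      unfold pvLabInit
      rw [List.getD_eq_getElem _ _ (by simpa using hi), List.getElem_map, List.getElem_range]
    unfold pvGetC
    rw [Int.toNat_natCast, Int.toNat_natCast, hrow,
      List.getD_eq_getElem _ _ (by simpa using hj), List.getElem_map, List.getElem_range]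
    simp [pvGetC]
  refine ⟨by simp [pvLabInit], ?_, ?_⟩
  · intro row hrow
    obtain ⟨i, -, he⟩ := List.mem_map.mp hrow
    rw [← he]
    simp
  · intro i j hi hj
    constructor
    · intro hoil
      have hval : pvGetC (pvLabInit land nN mN) (i : Int) (j : Int) =
          (i : Int) * (mN : Int) + (j : Int) := by
        rw [hget i j hi hj, if_pos hoil.2.2.2.2]
      constructor
      · exact ⟨((i : Int), (j : Int)), pvComp_self _, by rw [hval, hm]⟩
      · rw [hval, hm]
    · intro hno
      have h0 : pvGetC land (i : Int) (j : Int) = 0 := by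
        by_contra hne
        exact hno ⟨by positivity, by omega, by positivity, by omega, hne⟩
      rw [hget i j hi hj, if_neg (by simpa using h0)]


-- ===== B's aggregation scan =====
lemma pvGetD_modify (CL : List (List Int)) (k c : Nat) (f : List Int → List Int)
    (hk : k < CL.length) :
    (CL.modify k f).getD c [] = if c = k then f (CL.getD c []) else CL.getD c [] := by
  rw [List.getD_eq_getElem?_getD, List.getElem?_modify]
  by_cases h : c = k
  · subst h
    rw [if_pos rfl, List.getElem?_eq_getElem hk]
    simp [List.getD_eq_getElem?_getD, List.getElem?_eq_getElem hk]
  · rw [if_neg h]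
    rcases hx : CL[c]? with _ | row
    · simp [List.getD_eq_getElem?_getD, hx, Ne.symm h]
    · simp [List.getD_eq_getElem?_getD, hx, Ne.symm h]

lemma pvAggFold (lab : List (List Int)) (mN : Nat) :
    ∀ (todo done : List (Nat × Nat)) (CL : List (List Int)) (sz : List Int),
      (∀ p ∈ todo, p.2 < mN) → CL.length = mN →
      (∀ c : Nat, c < mN → ∀ r : Int, (r ∈ CL.getD c [] ↔ ∃ p ∈ done, p.2 = c ∧
        pvGetC lab (p.1 : Int) (p.2 : Int) ≠ -1 ∧ pvGetC lab (p.1 : Int) (p.2 : Int) = r)) →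
      sz = (done.filter (fun p => decide (pvGetC lab (p.1 : Int) (p.2 : Int) ≠ -1))).map
        (fun p => pvGetC lab (p.1 : Int) (p.2 : Int)) →
      (todo.foldl (fun st (p : Nat × Nat) =>
        if pvGetC lab (p.1 : Int) (p.2 : Int) ≠ -1 then
          (st.1.modify p.2 (fun s => PySem.Set.add s (pvGetC lab (p.1 : Int) (p.2 : Int))),
            st.2 ++ [pvGetC lab (p.1 : Int) (p.2 : Int)])
        else st)
        (CL, sz)).1.length = mN ∧
      (∀ c : Nat, c < mN → ∀ r : Int, (r ∈ (todo.foldl (fun st (p : Nat × Nat) =>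
        if pvGetC lab (p.1 : Int) (p.2 : Int) ≠ -1 then
          (st.1.modify p.2 (fun s => PySem.Set.add s (pvGetC lab (p.1 : Int) (p.2 : Int))),
            st.2 ++ [pvGetC lab (p.1 : Int) (p.2 : Int)])
        else st)
        (CL, sz)).1.getD c [] ↔ ∃ p ∈ done ++ todo, p.2 = c ∧
        pvGetC lab (p.1 : Int) (p.2 : Int) ≠ -1 ∧ pvGetC lab (p.1 : Int) (p.2 : Int) = r)) ∧
      (todo.foldl (fun st (p : Nat × Nat) =>
        if pvGetC lab (p.1 : Int) (p.2 : Int) ≠ -1 then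
          (st.1.modify p.2 (fun s => PySem.Set.add s (pvGetC lab (p.1 : Int) (p.2 : Int))),
            st.2 ++ [pvGetC lab (p.1 : Int) (p.2 : Int)])
        else st)
        (CL, sz)).2 = ((done ++ todo).filter
          (fun p => decide (pvGetC lab (p.1 : Int) (p.2 : Int) ≠ -1))).map
        (fun p => pvGetC lab (p.1 : Int) (p.2 : Int)) := by
  intro todo
  induction todo with
  | nil =>
    intro done CL sz _ hlen hCL hsz
    refine ⟨hlen, ?_, by simpa using hsz⟩
    intro c hc r
    simpa using hCL c hc r
  | cons p tl ih =>
    intro done CL sz hb hlen hCL hsz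
    obtain hp2 := (hb p List.mem_cons_self)
    simp only [List.foldl_cons]
    by_cases hr : pvGetC lab (p.1 : Int) (p.2 : Int) ≠ -1
    · rw [if_pos hr]
      have hres := ih (done ++ [p])
        (CL.modify p.2 (fun s => PySem.Set.add s (pvGetC lab (p.1 : Int) (p.2 : Int))))
        (sz ++ [pvGetC lab (p.1 : Int) (p.2 : Int)])
        (fun q hq => hb q (List.mem_cons_of_mem _ hq))
        (by simp [hlen])
        (by
          intro c hc r
          rw [pvGetD_modify _ _ _ _ (by omega)]
          by_cases hcp : c = p.2
          · rw [if_pos hcp]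
            rw [PySem.Set.mem_add]
            constructor
            · rintro (hin | rfl)
              · obtain ⟨q, hq, hqc, hqne, hqr⟩ := (hCL c hc r).mp hin
                exact ⟨q, List.mem_append_left _ hq, hqc, hqne, hqr⟩
              · exact ⟨p, List.mem_append_right _ List.mem_cons_self, hcp.symm, hr, rfl⟩
            · rintro ⟨q, hq, hqc, hqne, hqr⟩
              rcases List.mem_append.mp hq with hq' | hq'
              · exact Or.inl ((hCL c hc r).mpr ⟨q, hq', hqc, hqne, hqr⟩)
              · have : q = p := by simpa using hq'
                subst this
                exact Or.inr hqr.symm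
          · rw [if_neg hcp]
            rw [hCL c hc r]
            constructor
            · rintro ⟨q, hq, hqc, hqne, hqr⟩
              exact ⟨q, List.mem_append_left _ hq, hqc, hqne, hqr⟩
            · rintro ⟨q, hq, hqc, hqne, hqr⟩
              rcases List.mem_append.mp hq with hq' | hq'
              · exact ⟨q, hq', hqc, hqne, hqr⟩
              · have : q = p := by simpa using hq'
                subst this
                exact absurd hqc (fun hc' => hcp hc'.symm))
        (by
          rw [hsz, List.filter_append, List.map_append]
          simp [hr])
      simpa using hres
    · rw [if_neg hr]
      have hres := ih (done ++ [p]) CL sz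
        (fun q hq => hb q (List.mem_cons_of_mem _ hq)) hlen
        (by
          intro c hc r
          rw [hCL c hc r]
          constructor
          · rintro ⟨q, hq, hqc, hqne, hqr⟩
            exact ⟨q, List.mem_append_left _ hq, hqc, hqne, hqr⟩
          · rintro ⟨q, hq, hqc, hqne, hqr⟩
            rcases List.mem_append.mp hq with hq' | hq'
            · exact ⟨q, hq', hqc, hqne, hqr⟩
            · have : q = p := by simpa using hq'
              subst this
              exact absurd hqne hr)
        (by
          rw [hsz, List.filter_append]
          simp [hr])
      simpa using hres

lemma pvCountFold (S : List Int) :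
    ∀ (l : List Int) (t : Int),
      l.foldl (fun t r => if r ∈ S then t + 1 else t) t
        = t + (l.countP (fun r => decide (r ∈ S)) : Int) := by
  intro l
  induction l with
  | nil => intro t; simp
  | cons a tl ih =>
    intro t
    simp only [List.foldl_cons, List.countP_cons]
    by_cases ha : a ∈ S
    · rw [if_pos ha, ih]
      simp [ha]
      ring
    · rw [if_neg ha, ih]
      simp [ha]

lemma pvCountP_eq_ncard {α β : Type} [DecidableEq β] (l : List α) (hl : l.Nodup)
    (f : α → β) (hf : Function.Injective f) (φ : α → Bool) (S : Set β)
    (h1 : ∀ a ∈ l, (φ a = true ↔ f a ∈ S)) (h2 : ∀ b ∈ S, ∃ a ∈ l, f a = b) :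
    l.countP φ = S.ncard := by
  have hS : S = ↑((l.filter φ).map f).toFinset := by
    ext b
    simp only [List.coe_toFinset, Set.mem_setOf_eq, List.mem_map, List.mem_filter]
    constructor
    · intro hb
      obtain ⟨a, ha, rfl⟩ := h2 b hb
      exact ⟨a, ⟨ha, (h1 a ha).mpr hb⟩, rfl⟩
    · rintro ⟨a, ⟨ha, hφ⟩, rfl⟩
      exact (h1 a ha).mp hφ
  rw [hS, Set.ncard_coe_finset,
    List.toFinset_card_of_nodup ((hl.filter φ).map hf), List.length_map,
    ← List.countP_eq_length_filter]

lemma pvFoldlMax_congr :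
    ∀ (l : List Nat) (f g : Nat → Int), (∀ c ∈ l, f c = g c) →
      ∀ b : Int, l.foldl (fun b c => max b (f c)) b = l.foldl (fun b c => max b (g c)) b := by
  intro l
  induction l with
  | nil => intro f g _ b; rfl
  | cons a tl ih =>
    intro f g h b
    simp only [List.foldl_cons]
    rw [h a List.mem_cons_self]
    exact ih f g (fun c hc => h c (List.mem_cons_of_mem _ hc)) _

-- ===== VERDICT (by name: the statement is the Claim_ definition above) =====
theorem solution_spec : Claim_equal_solution := by
  unfold Claim_equal_solution
  intro land _ hpre
  obtain ⟨hne, hm0, -⟩ := hpre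
  unfold Spec_solution
  set nN := land.length with hnN
  set mN := (land.headD []).length with hmN
  set n : Int := (nN : Int) with hn
  set m : Int := (mN : Int) with hmI
  rw [pvSolutionA_char land hne hm0]
  simp only [solution_alt]
  rw [← hnN, ← hmN, ← hn, ← hmI]
  set lab0 := pvLabInit land nN mN with hlab0
  obtain ⟨hPfix, hFfix⟩ := pvLabLoop_fix (land := land) rfl rfl (pvLabMeasure lab0 + 1) lab0
    (pvLabInit_P land rfl rfl) (by omega)
  set labf := pvLabLoop n m nN mN (pvLabMeasure lab0 + 1) lab0 with hlabf
  rw [pvFoldl_nested (fun (st : List (List Int) × List Int) (i j : Nat) =>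
    if pvGetC labf (i : Int) (j : Int) ≠ -1 then
      (st.1.modify j (fun s => PySem.Set.add s (pvGetC labf (i : Int) (j : Int))),
        st.2 ++ [pvGetC labf (i : Int) (j : Int)])
    else st) nN mN]
  set aggres := (pvCells nN mN).foldl (fun st (p : Nat × Nat) =>
    if pvGetC labf (p.1 : Int) (p.2 : Int) ≠ -1 then
      (st.1.modify p.2 (fun s => PySem.Set.add s (pvGetC labf (p.1 : Int) (p.2 : Int))),
        st.2 ++ [pvGetC labf (p.1 : Int) (p.2 : Int)])
    else st)
    (List.replicate mN ([] : List Int), ([] : List Int)) with haggres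
  obtain ⟨hCLlen, hCLmem, hsz⟩ := pvAggFold labf mN (pvCells nN mN) []
    (List.replicate mN ([] : List Int)) ([])
    (fun p hp => (pvCells_mem.mp hp).2) (by simp)
    (by
      intro c hc r
      rw [List.getD_eq_getElem?_getD, List.getElem?_replicate]
      constructor
      · intro h
        rcases Nat.decLt c mN with hlt | hlt
        · simp [hlt] at h
        · simp [hlt] at h
      · rintro ⟨p, hp, -⟩
        simp at hp)
    (by simp)
  rw [← haggres] at hCLlen hCLmem hsz
  -- per-column equality of the two counts
  apply pvFoldlMax_congr
  intro c hc
  have hcm : c < mN := List.mem_range.mp hc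
  rw [pvCountFold (aggres.1.getD c []) aggres.2 0, zero_add]
  have hcount : aggres.2.countP (fun r => decide (r ∈ aggres.1.getD c [])) =
      ((pvOilSet n m land ∩ {w | pvTouch n m land w (c : Int)})).ncard := by
    rw [hsz]
    rw [List.countP_map, List.countP_filter]
    apply pvCountP_eq_ncard (pvCells nN mN) (pvCells_nodup nN mN)
      (fun p => ((p.1 : Int), (p.2 : Int)))
      (by
        intro a b h
        have h1 := congrArg Prod.fst h
        have h2 := congrArg Prod.snd h
        simp only at h1 h2
        exact Prod.ext (by omega) (by omega))
    · intro p hp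
      obtain ⟨hp1, hp2⟩ := pvCells_mem.mp hp
      simp only [Function.comp, Bool.and_eq_true, decide_eq_true_eq, Set.mem_inter_iff,
        Set.mem_setOf_eq]
      constructor
      · rintro ⟨hin, hne'⟩
        have hpoil : ((p.1 : Int), (p.2 : Int)) ∈ pvOilSet n m land :=
          (pvPB_ne_neg_iff rfl hPfix hp1 hp2).1 hne'
        refine ⟨hpoil, ?_⟩
        obtain ⟨q, hq, hqc, hqne, hqr⟩ := (hCLmem c hcm _).mp hin
        simp only [List.nil_append] at hq
        obtain ⟨hq1, hq2⟩ := pvCells_mem.mp hq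
        have hqoil : ((q.1 : Int), (q.2 : Int)) ∈ pvOilSet n m land :=
          (pvPB_ne_neg_iff rfl hPfix hq1 hq2).1 hqne
        have hcompeq : pvComp n m land ((q.1 : Int), (q.2 : Int)) =
            pvComp n m land ((p.1 : Int), (p.2 : Int)) :=
          (pvLab_eq_iff rfl rfl hPfix hFfix hqoil hpoil).mp hqr
        refine ⟨((q.1 : Int), (q.2 : Int)), ?_, by simp [hqc]⟩
        rw [← hcompeq]
        exact pvComp_self _
      · rintro ⟨hpoil, d, hd, hdc⟩
        have hne' : pvGetC labf (p.1 : Int) (p.2 : Int) ≠ -1 :=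
          (pvPB_ne_neg_iff rfl hPfix hp1 hp2).2 hpoil
        refine ⟨?_, hne'⟩
        apply (hCLmem c hcm _).mpr
        obtain ⟨d1, d2, d3, d4, d5⟩ := pvComp_oil hpoil hd
        have hq1 : d.1.toNat < nN := by omega
        have hq2 : d.2.toNat < mN := by omega
        have hc1 : ((d.1.toNat : Nat) : Int) = d.1 := Int.toNat_of_nonneg d1
        have hc2 : ((d.2.toNat : Nat) : Int) = d.2 := Int.toNat_of_nonneg d3
        refine ⟨(d.1.toNat, d.2.toNat), by simpa using pvCells_mem.mpr ⟨hq1, hq2⟩, by omega, ?_, ?_⟩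
        · show pvGetC labf ((d.1.toNat : Nat) : Int) ((d.2.toNat : Nat) : Int) ≠ -1
          rw [hc1, hc2]
          exact pvLab_ne_neg_int rfl rfl hPfix (pvComp_oil hpoil hd)
        · show pvGetC labf ((d.1.toNat : Nat) : Int) ((d.2.toNat : Nat) : Int) = _
          rw [hc1, hc2]
          exact pvLab_const rfl rfl hPfix hFfix hpoil d hd
    · intro b hb
      obtain ⟨⟨b1, b2, b3, b4, b5⟩, -⟩ := hb
      refine ⟨(b.1.toNat, b.2.toNat), pvCells_mem.mpr ⟨by omega, by omega⟩, ?_⟩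
      simp only
      rw [Int.toNat_of_nonneg b1, Int.toNat_of_nonneg b3]
  rw [hcount]
  rfl
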